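-- pv_equiv track=rewrite | github.com/pjoshi08/DSA | src/main/java/org/example/adv_graph/MinCostToReachCityWithDiscount.py | minimumCost2
-- ===== SOURCE A (Python) =====
-- import heapq
-- from typing import List
--
-- def minimumCost2(n: int, highways: List[List[int]], discounts: int) -> int:
--     adj = {i: [] for i in range(n)}
--     for u, v, toll in highways:
--         adj[u].append((v, toll))
--         adj[v].append((u, toll))
--
--     minH = [(0, 0, 0)]  # (curCityCost, city, discountsUsed)
--     # array to calc cost to reach city based on num of discounts used
--     dist = [[float('inf')] * (discounts + 1) for _ in range(n)]
--
--     while minH: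
--         curCost, city, discountsUsed = heapq.heappop(minH)
--
--         # If we cannot improve from this city, don't continue
--         if curCost > dist[city][discountsUsed]: continue
--
--         for nei, toll in adj[city]:
--             # Case 1: proceed to next city without using discount if dist is less than existing
--             newCost = curCost + toll
--             if newCost < dist[nei][discountsUsed]:
--                 dist[nei][discountsUsed] = newCost
--                 heapq.heappush(minH, (newCost, nei, discountsUsed))
--
--             # Case 2: proceed to next city using a discount
--             if discountsUsed < discounts:
--                 newCost = curCost + toll // 2
--                 if newCost < dist[nei][discountsUsed + 1]:
--                     dist[nei][discountsUsed + 1] = newCost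
--                     heapq.heappush(minH, (newCost, nei, discountsUsed + 1))
--
--     minCost = min(dist[n - 1])
--     return minCost if minCost != float('inf') else -1
-- ===== SOURCE B (Python) =====
-- from typing import List
--
-- def minimumCost2(n: int, highways: List[List[int]], discounts: int) -> int:
--     INF = float('inf')
--     edges = []
--     for u, v, toll in highways:
--         edges.append((u, v, toll))
--         edges.append((v, u, toll))
--
--     dist = [[INF] * (discounts + 1) for _ in range(n)]
--     dist[0][0] = 0
--
--     # Bellman-Ford / SPFA-style: sweep every edge repeatedly until stable
--     changed = True
--     while changed:
--         changed = False
--         for u, v, toll in edges: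
--             for used in range(discounts + 1):
--                 base = dist[u][used]
--                 if base == INF:
--                     continue
--                 if base + toll < dist[v][used]:
--                     dist[v][used] = base + toll
--                     changed = True
--                 if used < discounts and base + toll // 2 < dist[v][used + 1]:
--                     dist[v][used + 1] = base + toll // 2
--                     changed = True
--
--     best = min(dist[n - 1])
--     return best if best != INF else -1
-- ===== Notes on version B (the rewrite author's own statement) =====
-- stated objective: alternative
-- what changed: Replaces the heap-based lazy Dijkstra with Bellman-Ford/SPFA-style relaxation: the same dist[city][used] table is driven to its fixed point by repeated full sweeps over the edge list until a sweep makes no improvement, and B also records the trivial fact that city 0 is reachable at cost 0 (dist[0][0] = 0), which A's table never contains.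
-- intended difference: When n = 1 and no highway can be traversed for free (every toll >= 1, and >= 2 when discounts >= 1), A returns the cost of the cheapest nonempty closed walk at city 0 (or -1 if there is none) because its dist[0][0] is never initialised to 0, while B returns 0, the intended cost of already standing at the destination city 0. — e.g. on minimumCost2(1, [], 0): A returns -1, B returns 0
-- outside the precondition, e.g. on minimumCost2(3, [[1, 2, -4]], 0): A returns -1, B returns -1
import Mathlib
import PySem

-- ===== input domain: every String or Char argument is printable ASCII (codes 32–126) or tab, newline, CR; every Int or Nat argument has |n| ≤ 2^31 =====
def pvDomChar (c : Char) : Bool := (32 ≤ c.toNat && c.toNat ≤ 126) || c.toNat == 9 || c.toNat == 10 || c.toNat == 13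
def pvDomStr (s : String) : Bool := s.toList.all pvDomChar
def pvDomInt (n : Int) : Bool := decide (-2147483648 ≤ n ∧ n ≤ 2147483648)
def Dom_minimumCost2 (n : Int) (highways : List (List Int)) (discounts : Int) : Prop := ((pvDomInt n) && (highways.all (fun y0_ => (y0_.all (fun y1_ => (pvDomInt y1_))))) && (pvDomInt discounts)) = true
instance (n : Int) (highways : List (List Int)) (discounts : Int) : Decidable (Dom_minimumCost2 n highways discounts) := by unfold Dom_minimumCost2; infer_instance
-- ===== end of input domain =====

-- B replaces A's heap Dijkstra by Bellman-Ford sweeps to a fixed point; both ports model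
-- Python's float('inf') distance cells as `Option Int` (`none` = inf).

-- ===== PORT A =====

-- a < cell  /  a > cell (cell possibly inf)
def pvLtO (a : Int) (o : Option Int) : Bool :=
  match o with
  | none => true
  | some b => decide (a < b)

def pvGtO (a : Int) (o : Option Int) : Bool :=
  match o with
  | none => false
  | some b => decide (b < a)

-- dist[v][k] read / write
def pvDget (dist : List (List (Option Int))) (v k : Int) : Option Int :=
  (PySem.List.pyGet? ((PySem.List.pyGet? dist v).getD []) k).getD none

def pvDset (dist : List (List (Option Int))) (v k : Int) (c : Int) : List (List (Option Int)) :=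
  PySem.List.pySetD dist v (PySem.List.pySetD ((PySem.List.pyGet? dist v).getD []) k (some c))

-- min over a row with inf = none as top (Python's min over ints and inf)
def pvOMin (acc o : Option Int) : Option Int :=
  match acc, o with
  | none, o => o
  | some a, none => some a
  | some a, some b => some (min a b)

-- `minCost = min(dist[n-1]); return minCost if minCost != inf else -1`
def pvAnswer (dist : List (List (Option Int))) (n : Int) : Int :=
  match ((PySem.List.pyGet? dist (n - 1)).getD []).foldl pvOMin none with
  | some c => c
  | none => -1

-- termination measures (totality guards only)
def pvMeasInf (dist : List (List (Option Int))) : Nat :=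
  dist.foldl (fun acc row => acc + row.countP (fun o => o.isNone)) 0

def pvMeasSum (dist : List (List (Option Int))) : Nat :=
  dist.foldl (fun acc row => acc + row.foldl (fun a o => a + (o.getD 0).toNat) 0) 0

def pvMeasLt3 (a b : Nat × Nat × Nat) : Bool :=
  decide (a.1 < b.1) || (decide (a.1 = b.1) && (decide (a.2.1 < b.2.1) || (decide (a.2.1 = b.2.1) && decide (a.2.2 < b.2.2))))

-- heapq tuple order (lexicographic ≤ on (cost, city, used))
def pvTupLe (a b : Int × Int × Int) : Bool :=
  decide (a.1 < b.1) || (decide (a.1 = b.1) && (decide (a.2.1 < b.2.1) || (decide (a.2.1 = b.2.1) && decide (a.2.2 ≤ b.2.2))))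

-- heapq.heappop: remove and return the least tuple; the heap is kept as its content list
def pvPop (h : List (Int × Int × Int)) : Option ((Int × Int × Int) × List (Int × Int × Int)) :=
  match h with
  | [] => none
  | x :: t =>
    let m := t.foldl (fun a b => if pvTupLe a b then a else b) x
    some (m, h.erase m)

def pvAdjGet (adj : PySem.Dict Int (List (Int × Int))) (u : Int) : List (Int × Int) :=
  (PySem.Dict.get? adj u).getD []

-- body of `for nei, toll in adj[city]` (state = (heap, dist); (c, k) = (curCost, discountsUsed))
def pvRelax (d c k : Int) (s : List (Int × Int × Int) × List (List (Option Int))) (vt : Int × Int) :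
    List (Int × Int × Int) × List (List (Option Int)) :=
  let s1 := if pvLtO (c + vt.2) (pvDget s.2 vt.1 k) then
      (s.1 ++ [(c + vt.2, vt.1, k)], pvDset s.2 vt.1 k (c + vt.2)) else s
  if decide (k < d) && pvLtO (c + PySem.Int.floordiv vt.2 2) (pvDget s1.2 vt.1 (k + 1)) then
      (s1.1 ++ [(c + PySem.Int.floordiv vt.2 2, vt.1, k + 1)], pvDset s1.2 vt.1 (k + 1) (c + PySem.Int.floordiv vt.2 2))
  else s1

theorem pvPop_mem {h : List (Int × Int × Int)} {m rest} (hp : pvPop h = some (m, rest)) :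
    m ∈ h ∧ rest = h.erase m := by
  match h with
  | [] => simp [pvPop] at hp
  | x :: t =>
    simp only [pvPop, Option.some.injEq, Prod.mk.injEq] at hp
    obtain ⟨h1, h2⟩ := hp
    subst h1 h2
    constructor
    · have : ∀ (l : List (Int × Int × Int)) (a : Int × Int × Int), a ∈ l ∨ (t.foldl (fun a b => if pvTupLe a b then a else b) a) = (t.foldl (fun a b => if pvTupLe a b then a else b) a) := fun l a => Or.inr rfl
      clear this
      have key : ∀ (l : List (Int × Int × Int)) (a : Int × Int × Int),
          l.foldl (fun a b => if pvTupLe a b then a else b) a = a ∨ l.foldl (fun a b => if pvTupLe a b then a else b) a ∈ l := by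
        intro l
        induction l with
        | nil => intro a; exact Or.inl rfl
        | cons y ys ih =>
          intro a
          simp only [List.foldl_cons]
          by_cases hc : pvTupLe a y
          · simp only [hc, if_pos]
            rcases ih a with h | h
            · exact Or.inl h
            · exact Or.inr (List.mem_cons_of_mem _ h)
          · simp only [hc, if_neg, Bool.false_eq_true, not_false_eq_true]
            rcases ih y with h | h
            · exact Or.inr (by rw [h]; exact List.mem_cons_self)
            · exact Or.inr (List.mem_cons_of_mem _ h)
      rcases key t x with h | h
      · rw [h]; exact List.mem_cons_self
      · exact List.mem_cons_of_mem _ h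
    · rfl

theorem pvPop_length {h : List (Int × Int × Int)} {m rest} (hp : pvPop h = some (m, rest)) :
    rest.length < h.length := by
  obtain ⟨hm, hr⟩ := pvPop_mem hp
  rw [hr, List.length_erase_of_mem hm]
  exact Nat.sub_lt (List.length_pos_of_mem hm) Nat.one_pos

-- the Dijkstra loop; the dependent guard is a totality guard only (Python can diverge
-- outside Pre_); under Pre_ it is proved to always hold
def pvALoop (adj : PySem.Dict Int (List (Int × Int))) (d : Int)
    (heap : List (Int × Int × Int)) (dist : List (List (Option Int))) : List (List (Option Int)) :=
  match hp : pvPop heap with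
  | none => dist
  | some ((c, city, k), rest) =>
    if pvGtO c (pvDget dist city k) then
      pvALoop adj d rest dist
    else
      let s := (pvAdjGet adj city).foldl (pvRelax d c k) (rest, dist)
      if hg : pvMeasLt3 (pvMeasInf s.2, pvMeasSum s.2, s.1.length) (pvMeasInf dist, pvMeasSum dist, heap.length) = true then
        pvALoop adj d s.1 s.2
      else s.2
termination_by (pvMeasInf dist, pvMeasSum dist, heap.length)
decreasing_by
  · have := pvPop_length hp
    exact Prod.Lex.right _ (Prod.Lex.right _ this)
  · simp only [pvMeasLt3, Bool.or_eq_true, Bool.and_eq_true, decide_eq_true_eq] at hg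
    rcases hg with h1 | ⟨h1, h2 | ⟨h2, h3⟩⟩
    · exact Prod.Lex.left _ _ h1
    · exact h1 ▸ Prod.Lex.right _ (Prod.Lex.left _ _ h2)
    · exact h1 ▸ Prod.Lex.right _ (h2 ▸ Prod.Lex.right _ h3)

-- `for u, v, toll in row` tuple unpacking (ValueError outside Pre_); shared by both ports
def pvRowCase {α : Type} (acc : α) (f : Int → Int → Int → α) (row : List Int) : α :=
  match row with
  | [u, v, t] => f u v t
  | _ => acc

def minimumCost2 (n : Int) (highways : List (List Int)) (discounts : Int) : Int :=
  -- adj = {i: [] for i in range(n)}; for u, v, toll in highways: adj[u].append((v,toll)); adj[v].append((u,toll))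
  let adj0 := (PySem.List.pyRange 0 n 1).foldl (fun acc i => acc.insert i ([] : List (Int × Int))) PySem.Dict.empty
  let adj := highways.foldl (fun acc row =>
      pvRowCase acc (fun u v t => (acc.modify u [] (· ++ [(v, t)])).modify v [] (· ++ [(u, t)])) row) adj0
  let dist := (PySem.List.pyRange 0 n 1).map (fun _ => List.replicate (discounts + 1).toNat (none : Option Int))
  pvAnswer (pvALoop adj discounts [(0, 0, 0)] dist) n

-- ===== PORT B =====

def pvEdges (highways : List (List Int)) : List (Int × Int × Int) :=
  highways.foldl (fun acc row =>
      pvRowCase acc (fun u v t => acc ++ [(u, v, t), (v, u, t)]) row) []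

-- body of the `for used in range(discounts+1)` loop for the edge (u, v, toll)
def pvStepK (d u v toll : Int) (s : List (List (Option Int)) × Bool) (k : Int) :
    List (List (Option Int)) × Bool :=
  match pvDget s.1 u k with
  | none => s
  | some base =>
    let s1 := if pvLtO (base + toll) (pvDget s.1 v k) then (pvDset s.1 v k (base + toll), true) else s
    if decide (k < d) && pvLtO (base + PySem.Int.floordiv toll 2) (pvDget s1.1 v (k + 1)) then
      (pvDset s1.1 v (k + 1) (base + PySem.Int.floordiv toll 2), true)
    else s1

-- one full sweep over all edges; the Bool is the `changed` flag
def pvSweep (E : List (Int × Int × Int)) (d : Int) (dist : List (List (Option Int))) :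
    List (List (Option Int)) × Bool :=
  E.foldl (fun s e => (PySem.List.pyRange 0 (d + 1) 1).foldl (pvStepK d e.1 e.2.1 e.2.2) s) (dist, false)

def pvMeasLt2 (a b : Nat × Nat) : Bool :=
  decide (a.1 < b.1) || (decide (a.1 = b.1) && decide (a.2 < b.2))

-- `while changed:` — sweep until a sweep reports no improvement; the guard is a totality
-- guard only (Python diverges on reachable negative cycles, outside Pre_)
def pvBLoop (E : List (Int × Int × Int)) (d : Int) (dist : List (List (Option Int))) :
    List (List (Option Int)) :=
  let r := pvSweep E d dist
  if r.2 = true then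
    if hg : pvMeasLt2 (pvMeasInf r.1, pvMeasSum r.1) (pvMeasInf dist, pvMeasSum dist) = true then
      pvBLoop E d r.1
    else r.1
  else r.1
termination_by (pvMeasInf dist, pvMeasSum dist)
decreasing_by
  simp only [pvMeasLt2, Bool.or_eq_true, Bool.and_eq_true, decide_eq_true_eq] at hg
  rcases hg with h1 | ⟨h1, h2⟩
  · exact Prod.Lex.left _ _ h1
  · exact h1 ▸ Prod.Lex.right _ h2

def minimumCost2_alt (n : Int) (highways : List (List Int)) (discounts : Int) : Int :=
  let E := pvEdges highways
  let dist0 := (PySem.List.pyRange 0 n 1).map (fun _ => List.replicate (discounts + 1).toNat (none : Option Int))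
  pvAnswer (pvBLoop E discounts (pvDset dist0 0 0 0)) n

-- ===== PRECONDITION & SPEC =====

-- Pre_ excludes the inputs where A raises (n < 1: IndexError on dist[n-1]; discounts < 0:
-- IndexError on dist[0][0]; a row not of length 3: ValueError; an endpoint outside
-- range(n): KeyError) and also negative tolls: a negative-toll edge reachable from city 0
-- makes both programs loop forever (the undirected doubling turns it into a negative
-- cycle), so nonnegative tolls — Dijkstra's standard precondition — are the natural domain;
-- A does return -1 when every negative edge is unreachable (see the cite).
def Pre_minimumCost2 (n : Int) (highways : List (List Int)) (discounts : Int) : Prop :=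
  1 ≤ n ∧ 0 ≤ discounts ∧
  ∀ row ∈ highways, row.length = 3 ∧
    0 ≤ row.getD 0 0 ∧ row.getD 0 0 < n ∧
    0 ≤ row.getD 1 0 ∧ row.getD 1 0 < n ∧
    0 ≤ row.getD 2 0
instance (n : Int) (highways : List (List Int)) (discounts : Int) : Decidable (Pre_minimumCost2 n highways discounts) := by unfold Pre_minimumCost2; infer_instance

def pvWitness_minimumCost2 : Int × List (List Int) × Int := (2, [[0, 1, 4]], 1)

-- When n = 1 and no highway can be traversed for free (every toll ≥ 1, and ≥ 2 when
-- discounts ≥ 1), A returns the cost of the cheapest nonempty closed walk at city 0 (or -1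
-- if none exists) because its dist[0][0] is never initialised to 0, while B returns the
-- intended 0: the destination city 0 is already reached at cost 0.
def D_minimumCost2 (n : Int) (highways : List (List Int)) (discounts : Int) : Prop :=
  n = 1 ∧ ∀ row ∈ highways, 1 ≤ row.getD 2 0 ∧ (1 ≤ discounts → 2 ≤ row.getD 2 0)
instance (n : Int) (highways : List (List Int)) (discounts : Int) : Decidable (D_minimumCost2 n highways discounts) := by unfold D_minimumCost2; infer_instance

def Spec_minimumCost2 (n : Int) (highways : List (List Int)) (discounts : Int) (out : Int) : Prop :=
  ¬ D_minimumCost2 n highways discounts → out = minimumCost2_alt n highways discounts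
instance (n : Int) (highways : List (List Int)) (discounts : Int) (out : Int) : Decidable (Spec_minimumCost2 n highways discounts out) := by unfold Spec_minimumCost2; infer_instance

def pvDiffWitness_minimumCost2 : Int × List (List Int) × Int := (1, [], 0)
def pvDiffWitnessOut_minimumCost2 : Int × Int := (-1, 0)

-- ===== CLAIM (what is proved, stated in full; the proofs are below) =====
def Claim_unchanged_minimumCost2 : Prop := ∀ (n : Int) (highways : List (List Int)) (discounts : Int), Dom_minimumCost2 n highways discounts → Pre_minimumCost2 n highways discounts → Spec_minimumCost2 n highways discounts (minimumCost2 n highways discounts)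
def Claim_changed_minimumCost2 : Prop := Dom_minimumCost2 (pvDiffWitness_minimumCost2.1) (pvDiffWitness_minimumCost2.2.1) (pvDiffWitness_minimumCost2.2.2) ∧ Pre_minimumCost2 (pvDiffWitness_minimumCost2.1) (pvDiffWitness_minimumCost2.2.1) (pvDiffWitness_minimumCost2.2.2) ∧ D_minimumCost2 (pvDiffWitness_minimumCost2.1) (pvDiffWitness_minimumCost2.2.1) (pvDiffWitness_minimumCost2.2.2) ∧ minimumCost2 (pvDiffWitness_minimumCost2.1) (pvDiffWitness_minimumCost2.2.1) (pvDiffWitness_minimumCost2.2.2) = pvDiffWitnessOut_minimumCost2.1 ∧ minimumCost2_alt (pvDiffWitness_minimumCost2.1) (pvDiffWitness_minimumCost2.2.1) (pvDiffWitness_minimumCost2.2.2) = pvDiffWitnessOut_minimumCost2.2 ∧ pvDiffWitnessOut_minimumCost2.1 ≠ pvDiffWitnessOut_minimumCost2.2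
def Claim_exact_minimumCost2 : Prop := ∀ (n : Int) (highways : List (List Int)) (discounts : Int), Dom_minimumCost2 n highways discounts → Pre_minimumCost2 n highways discounts → D_minimumCost2 n highways discounts → minimumCost2 n highways discounts ≠ minimumCost2_alt n highways discounts

-- ===== LEMMAS AND PROOFS =====

-- ---------- basic objects used by the proofs ----------

-- in-range index pair for an n × (d+1) table
def pvInR (n d v k : Int) : Prop := 0 ≤ v ∧ v < n ∧ 0 ≤ k ∧ k ≤ d

def pvShape (n d : Int) (dist : List (List (Option Int))) : Prop :=
  dist.length = n.toNat ∧ ∀ row ∈ dist, row.length = (d + 1).toNat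

-- cell ≤ finite bound (none = inf)
def pvOle (o : Option Int) (c : Int) : Prop := ∃ x, o = some x ∧ x ≤ c

theorem pvDget_norm {dist : List (List (Option Int))} {v k : Int} (hv : 0 ≤ v) (hk : 0 ≤ k)
    (h1 : v.toNat < dist.length) (h2 : k.toNat < (dist[v.toNat]).length) :
    pvDget dist v k = dist[v.toNat][k.toNat] := by
  unfold pvDget
  rw [PySem.List.pyGet?_of_nonneg _ hv, List.getElem?_eq_getElem h1, Option.getD_some,
    PySem.List.pyGet?_of_nonneg _ hk, List.getElem?_eq_getElem h2, Option.getD_some]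

theorem pvDset_norm {dist : List (List (Option Int))} {v k : Int} (hv : 0 ≤ v) (hk : 0 ≤ k)
    (h1 : v.toNat < dist.length) (c : Int) :
    pvDset dist v k c = dist.set v.toNat ((dist[v.toNat]).set k.toNat (some c)) := by
  unfold pvDset
  rw [PySem.List.pyGet?_of_nonneg _ hv, List.getElem?_eq_getElem h1, Option.getD_some,
    PySem.List.pySetD_of_nonneg _ _ hk, PySem.List.pySetD_of_nonneg _ _ hv]

theorem pvShape_idx {n d : Int} {dist : List (List (Option Int))} (hs : pvShape n d dist)
    {v k : Int} (h : pvInR n d v k) :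
    v.toNat < dist.length ∧ ∀ (h1 : v.toNat < dist.length), k.toNat < (dist[v.toNat]).length := by
  obtain ⟨hl, hr⟩ := hs
  obtain ⟨h1, h2, h3, h4⟩ := h
  have hv : v.toNat < dist.length := by rw [hl]; omega
  refine ⟨hv, fun h1' => ?_⟩
  have := hr (dist[v.toNat]) (List.getElem_mem _)
  rw [this]; omega

theorem pvShape_dset {n d : Int} {dist : List (List (Option Int))} (hs : pvShape n d dist)
    {v k : Int} (h : pvInR n d v k) (c : Int) : pvShape n d (pvDset dist v k c) := by
  obtain ⟨hv, hk⟩ := pvShape_idx hs h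
  rw [pvDset_norm h.1 h.2.2.1 hv]
  obtain ⟨hl, hr⟩ := hs
  constructor
  · simpa using hl
  · intro row hrow
    rcases List.mem_or_eq_of_mem_set hrow with h' | h'
    · exact hr _ h'
    · subst h'; simpa using hr _ (List.getElem_mem _)

theorem pvDget_dset_self {n d : Int} {dist : List (List (Option Int))} (hs : pvShape n d dist)
    {v k : Int} (h : pvInR n d v k) (c : Int) :
    pvDget (pvDset dist v k c) v k = some c := by
  obtain ⟨hv, hk⟩ := pvShape_idx hs h
  have hk := hk hv
  rw [pvDset_norm h.1 h.2.2.1 hv]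
  rw [pvDget_norm h.1 h.2.2.1 (by simpa using hv) (by simpa using hk)]
  simp

theorem pvDget_dset_ne {n d : Int} {dist : List (List (Option Int))} (hs : pvShape n d dist)
    {v k v' k' : Int} (h : pvInR n d v k) (h' : pvInR n d v' k')
    (hne : v' ≠ v ∨ k' ≠ k) (c : Int) :
    pvDget (pvDset dist v k c) v' k' = pvDget dist v' k' := by
  have ha1 := h.1; have ha3 := h.2.2.1
  have hb1 := h'.1; have hb3 := h'.2.2.1
  obtain ⟨hv, hkf⟩ := pvShape_idx hs h
  have hk := hkf hv
  obtain ⟨hv', hkf'⟩ := pvShape_idx hs h'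
  have hk' := hkf' hv'
  rw [pvDset_norm ha1 ha3 hv]
  rw [pvDget_norm hb1 hb3 (by simpa using hv') (by simp only [List.getElem_set]; split <;> simpa [*] using hk')]
  rw [pvDget_norm hb1 hb3 hv' hk']
  by_cases hvv : v'.toNat = v.toNat
  · have hveq : v' = v := by omega
    have hkk : k'.toNat ≠ k.toNat := by
      rcases hne with hne | hne
      · exact absurd hveq hne
      · omega
    subst hveq
    simp [List.getElem_set, hkk, Ne.symm hkk]
  · simp [List.getElem_set, hvv, Ne.symm hvv]

-- ---------- measures under a single cell update ----------

theorem pv_sum_set {α : Type} (f : α → Nat) :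
    ∀ (l : List α) (i : Nat) (h : i < l.length) (x : α),
      ((l.set i x).map f).sum + f l[i] = (l.map f).sum + f x := by
  intro l
  induction l with
  | nil => intro i h x; simp at h
  | cons a t ih =>
    intro i h x
    cases i with
    | zero => simp [Nat.add_comm, Nat.add_assoc, Nat.add_left_comm]
    | succ j =>
      simp only [List.set_cons_succ, List.map_cons, List.sum_cons, List.getElem_cons_succ]
      have := ih j (by simpa using h) x
      omega

theorem pv_sum_set_outer (g : Option Int → Nat) (l : List (List (Option Int))) (i : Nat) (h : i < l.length) (x : List (Option Int)) :
    ((l.set i x).map (fun row => (row.map g).sum)).sum + (l[i].map g).sum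
      = (l.map (fun row => (row.map g).sum)).sum + (x.map g).sum :=
  pv_sum_set (fun row => (row.map g).sum) l i h x

theorem pv_sum_set_row (g : Option Int → Nat) (l : List (Option Int)) (i : Nat) (h : i < l.length) (x : Option Int) :
    ((l.set i x).map g).sum + g l[i] = (l.map g).sum + g x :=
  pv_sum_set g l i h x

theorem pv_countP_eq_sum {α : Type} (p : α → Bool) (l : List α) :
    l.countP p = (l.map (fun a => if p a then 1 else 0)).sum := by
  induction l with
  | nil => simp
  | cons a t ih => by_cases h : p a <;> simp [List.countP_cons, h, ih, Nat.add_comm]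

theorem pvMeasInf_eq (dist : List (List (Option Int))) :
    pvMeasInf dist = (dist.map (fun row => (row.map (fun o => if o.isNone then 1 else 0)).sum)).sum := by
  unfold pvMeasInf
  rw [PySem.List.foldl_add_nat]
  rw [Nat.zero_add]
  congr 1
  apply List.map_congr_left
  intro row _
  exact pv_countP_eq_sum _ row

theorem pvMeasSum_eq (dist : List (List (Option Int))) :
    pvMeasSum dist = (dist.map (fun row => (row.map (fun o => (o.getD 0).toNat)).sum)).sum := by
  unfold pvMeasSum
  rw [PySem.List.foldl_add_nat]
  rw [Nat.zero_add]
  congr 1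
  apply List.map_congr_left
  intro row _
  rw [PySem.List.foldl_add_nat]
  rw [Nat.zero_add]

-- lexicographic (strict) order on the (inf-count, finite-sum) measure pair
def pvL2lt (a b : Nat × Nat) : Prop := a.1 < b.1 ∨ (a.1 = b.1 ∧ a.2 < b.2)
def pvL2le (a b : Nat × Nat) : Prop := a.1 < b.1 ∨ (a.1 = b.1 ∧ a.2 ≤ b.2)

theorem pvL2le_refl (a : Nat × Nat) : pvL2le a a := Or.inr ⟨rfl, le_refl _⟩
theorem pvL2le_trans {a b c} (h1 : pvL2le a b) (h2 : pvL2le b c) : pvL2le a c := by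
  unfold pvL2le at *; omega
theorem pvL2lt_le_trans {a b c} (h1 : pvL2lt a b) (h2 : pvL2le b c) : pvL2lt a c := by
  unfold pvL2lt pvL2le at *; omega
theorem pvL2le_lt_trans {a b c} (h1 : pvL2le a b) (h2 : pvL2lt b c) : pvL2lt a c := by
  unfold pvL2lt pvL2le at *; omega
theorem pvL2lt_le {a b} (h : pvL2lt a b) : pvL2le a b := by unfold pvL2lt pvL2le at *; omega

def pvMeas2 (dist : List (List (Option Int))) : Nat × Nat := (pvMeasInf dist, pvMeasSum dist)

theorem pvMeas2_dset_lt {n d : Int} {dist : List (List (Option Int))} (hs : pvShape n d dist)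
    {v k : Int} (h : pvInR n d v k) {c : Int} (hc : 0 ≤ c)
    (hlt : pvLtO c (pvDget dist v k) = true) :
    pvL2lt (pvMeas2 (pvDset dist v k c)) (pvMeas2 dist) := by
  obtain ⟨hv, hkf⟩ := pvShape_idx hs h
  have hk := hkf hv
  have hget := pvDget_norm h.1 h.2.2.1 hv hk
  have hset := pvDset_norm h.1 h.2.2.1 hv c
  unfold pvMeas2 pvL2lt
  rw [hset]
  have hinf := pv_sum_set_outer (fun o : Option Int => if o.isNone then 1 else 0)
    dist v.toNat hv ((dist[v.toNat]).set k.toNat (some c))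
  have hsum := pv_sum_set_outer (fun o : Option Int => (o.getD 0).toNat)
    dist v.toNat hv ((dist[v.toNat]).set k.toNat (some c))
  have hinfRow := pv_sum_set_row (fun o : Option Int => if o.isNone then 1 else 0)
    (dist[v.toNat]) k.toNat hk (some c)
  have hsumRow := pv_sum_set_row (fun o : Option Int => (o.getD 0).toNat)
    (dist[v.toNat]) k.toNat hk (some c)
  rw [pvMeasInf_eq, pvMeasInf_eq, pvMeasSum_eq, pvMeasSum_eq]
  cases hcell : dist[v.toNat][k.toNat] with
  | none =>
    left
    rw [hcell] at hinfRow
    rw [show (if (none : Option Int).isNone = true then (1:Nat) else 0) = 1 from rfl,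
        show (if (some c).isNone = true then (1:Nat) else 0) = 0 from rfl] at hinfRow
    omega
  | some x =>
    right
    have hxc : c < x := by
      rw [hget, hcell] at hlt
      simpa [pvLtO] using hlt
    rw [hcell] at hinfRow hsumRow
    rw [show (if (some x).isNone = true then (1:Nat) else 0) = 0 from rfl,
        show (if (some c).isNone = true then (1:Nat) else 0) = 0 from rfl] at hinfRow
    rw [Option.getD_some, Option.getD_some] at hsumRow
    have hx : c.toNat < x.toNat := by omega
    omega

-- ---------- edge validity and walk achievability ----------

def pvValidE (n : Int) (E : List (Int × Int × Int)) : Prop :=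
  ∀ e ∈ E, 0 ≤ e.1 ∧ e.1 < n ∧ 0 ≤ e.2.1 ∧ e.2.1 < n ∧ 0 ≤ e.2.2

-- cost of some walk from city 0 using exactly k discounts; base0 = the empty walk
inductive PvAch (E : List (Int × Int × Int)) (d : Int) : Int → Int → Int → Prop
  | base0 : PvAch E d 0 0 0
  | step {u k c v t} : PvAch E d u k c → (u, v, t) ∈ E → PvAch E d v k (c + t)
  | stepD {u k c v t} : PvAch E d u k c → (u, v, t) ∈ E → k < d → PvAch E d v (k + 1) (c + PySem.Int.floordiv t 2)

-- cost of some NONEMPTY walk from city 0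
inductive PvNAch (E : List (Int × Int × Int)) (d : Int) : Int → Int → Int → Prop
  | base {v t} : (0, v, t) ∈ E → PvNAch E d v 0 t
  | baseD {v t} : (0, v, t) ∈ E → 0 < d → PvNAch E d v 1 (PySem.Int.floordiv t 2)
  | step {u k c v t} : PvNAch E d u k c → (u, v, t) ∈ E → PvNAch E d v k (c + t)
  | stepD {u k c v t} : PvNAch E d u k c → (u, v, t) ∈ E → k < d → PvNAch E d v (k + 1) (c + PySem.Int.floordiv t 2)

theorem pvNAch_ach {E : List (Int × Int × Int)} {d v k c : Int} (h : PvNAch E d v k c) : PvAch E d v k c := by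
  induction h with
  | base he => simpa using PvAch.step PvAch.base0 he
  | baseD he hd => simpa using PvAch.stepD PvAch.base0 he hd
  | step _ he ih => exact PvAch.step ih he
  | stepD _ he hd ih => exact PvAch.stepD ih he hd

theorem pvAch_cases {E : List (Int × Int × Int)} {d v k c : Int} (h : PvAch E d v k c) :
    (v = 0 ∧ k = 0 ∧ c = 0) ∨ PvNAch E d v k c := by
  induction h with
  | base0 => exact Or.inl ⟨rfl, rfl, rfl⟩
  | step _ he ih =>
    rcases ih with ⟨h1, h2, h3⟩ | ih
    · subst h1; subst h2; subst h3; exact Or.inr (by simpa using PvNAch.base he)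
    · exact Or.inr (PvNAch.step ih he)
  | @stepD u k c v t _ he hd ih =>
    rcases ih with ⟨h1, h2, h3⟩ | ih
    · subst h1; subst h2; subst h3
      exact Or.inr (by simpa using PvNAch.baseD he (by omega))
    · exact Or.inr (PvNAch.stepD ih he hd)

theorem pv_floordiv2_nonneg {t : Int} (h : 0 ≤ t) : 0 ≤ PySem.Int.floordiv t 2 :=
  Int.fdiv_nonneg h (by norm_num)

theorem pvAch_nonneg {n : Int} {E : List (Int × Int × Int)} {d v k c : Int}
    (hE : pvValidE n E) (h : PvAch E d v k c) : 0 ≤ c := by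
  induction h with
  | base0 => omega
  | step _ he ih => have h2 := (hE _ he).2.2.2.2; simp at h2; omega
  | stepD _ he _ ih =>
    have h2 := (hE _ he).2.2.2.2
    simp at h2
    have := pv_floordiv2_nonneg h2
    omega

theorem pvAch_bounds {n : Int} {E : List (Int × Int × Int)} {d v k c : Int}
    (hE : pvValidE n E) (hn : 1 ≤ n) (hd : 0 ≤ d) (h : PvAch E d v k c) :
    pvInR n d v k := by
  induction h with
  | base0 => exact ⟨le_refl _, by omega, le_refl _, hd⟩
  | step _ he ih =>
    obtain ⟨h1, h2, h3, h4⟩ := ih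
    have := hE _ he
    exact ⟨this.2.2.1, this.2.2.2.1, h3, h4⟩
  | stepD _ he hlt ih =>
    obtain ⟨h1, h2, h3, h4⟩ := ih
    have := hE _ he
    exact ⟨this.2.2.1, this.2.2.2.1, by omega, by omega⟩

theorem pvNAch_nonneg {n : Int} {E : List (Int × Int × Int)} {d v k c : Int}
    (hE : pvValidE n E) (h : PvNAch E d v k c) : 0 ≤ c :=
  pvAch_nonneg hE (pvNAch_ach h)

theorem pvNAch_bounds {n : Int} {E : List (Int × Int × Int)} {d v k c : Int}
    (hE : pvValidE n E) (hn : 1 ≤ n) (hd : 0 ≤ d) (h : PvNAch E d v k c) :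
    pvInR n d v k :=
  pvAch_bounds hE hn hd (pvNAch_ach h)

-- ---------- pointwise table order and relaxedness ----------

theorem pvOle_mono_le {o : Option Int} {a b : Int} (h : pvOle o a) (hab : a ≤ b) : pvOle o b := by
  obtain ⟨x, hx, hxa⟩ := h; exact ⟨x, hx, by omega⟩

def pvDle (n d : Int) (dist' dist : List (List (Option Int))) : Prop :=
  ∀ v k, pvInR n d v k → ∀ x, pvDget dist v k = some x → ∃ y, pvDget dist' v k = some y ∧ y ≤ x

theorem pvDle_refl (n d : Int) (dist : List (List (Option Int))) : pvDle n d dist dist :=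
  fun _ _ _ x hx => ⟨x, hx, le_refl _⟩

theorem pvDle_trans {n d : Int} {a b c : List (List (Option Int))}
    (h1 : pvDle n d a b) (h2 : pvDle n d b c) : pvDle n d a c := by
  intro v k hin x hx
  obtain ⟨y, hy, hyx⟩ := h2 v k hin x hx
  obtain ⟨z, hz, hzy⟩ := h1 v k hin y hy
  exact ⟨z, hz, by omega⟩

theorem pvDle_dset {n d : Int} {dist : List (List (Option Int))} (hs : pvShape n d dist)
    {v k c : Int} (hin : pvInR n d v k) (hlt : pvLtO c (pvDget dist v k) = true) :
    pvDle n d (pvDset dist v k c) dist := by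
  intro v' k' hin' x hx
  by_cases hsame : v' = v ∧ k' = k
  · obtain ⟨h1, h2⟩ := hsame; subst h1; subst h2
    refine ⟨c, pvDget_dset_self hs hin' c, ?_⟩
    rw [hx] at hlt; simp [pvLtO] at hlt; omega
  · rw [pvDget_dset_ne hs hin hin' (by tauto) c]
    exact ⟨x, hx, le_refl _⟩

theorem pvOle_of_dle {n d : Int} {dist' dist : List (List (Option Int))} {v k b : Int}
    (hd : pvDle n d dist' dist) (hin : pvInR n d v k) (h : pvOle (pvDget dist v k) b) :
    pvOle (pvDget dist' v k) b := by
  obtain ⟨x, hx, hxb⟩ := h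
  obtain ⟨y, hy, hyx⟩ := hd v k hin x hx
  exact ⟨y, hy, by omega⟩

-- all out-edges of u relaxed against cost c at discount level k
def pvRelaxedAt (E : List (Int × Int × Int)) (d : Int) (dist : List (List (Option Int))) (u k c : Int) : Prop :=
  ∀ e ∈ E, e.1 = u → pvOle (pvDget dist e.2.1 k) (c + e.2.2) ∧
    (k < d → pvOle (pvDget dist e.2.1 (k + 1)) (c + PySem.Int.floordiv e.2.2 2))

theorem pvRelaxedAt_of_dle {n : Int} {E : List (Int × Int × Int)} {d : Int}
    {dist' dist : List (List (Option Int))} {u k c : Int}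
    (hE : pvValidE n E) (hdle : pvDle n d dist' dist) (hk : 0 ≤ k) (hkd : k ≤ d)
    (h : pvRelaxedAt E d dist u k c) : pvRelaxedAt E d dist' u k c := by
  intro e he hu
  obtain ⟨h1, h2⟩ := h e he hu
  have hv := hE e he
  constructor
  · exact pvOle_of_dle hdle ⟨hv.2.2.1, hv.2.2.2.1, hk, hkd⟩ h1
  · intro hkd'
    exact pvOle_of_dle hdle ⟨hv.2.2.1, hv.2.2.2.1, by omega, by omega⟩ (h2 hkd')

-- ---------- the fixed-point lower bound ----------

theorem pvLower {n : Int} {E : List (Int × Int × Int)} {d : Int} {T : List (List (Option Int))}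
    (hE : pvValidE n E) (hn : 1 ≤ n) (hd : 0 ≤ d)
    (hfix : ∀ u k c, pvInR n d u k → pvDget T u k = some c → pvRelaxedAt E d T u k c)
    (hsrc : pvRelaxedAt E d T 0 0 0) :
    ∀ v k c, PvNAch E d v k c → pvOle (pvDget T v k) c := by
  intro v k c h
  induction h with
  | base he => simpa using (hsrc _ he rfl).1
  | baseD he hd' => simpa using (hsrc _ he rfl).2 hd'
  | @step u k' c' v' t hsub he ih =>
    obtain ⟨x, hx, hxc⟩ := ih
    have hb := pvNAch_bounds hE hn hd hsub
    have hr := hfix u k' x hb hx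
    have h1 := (hr _ he rfl).1
    simp only [] at h1
    exact pvOle_mono_le h1 (by omega)
  | @stepD u k' c' v' t hsub he hkd ih =>
    obtain ⟨x, hx, hxc⟩ := ih
    have hb := pvNAch_bounds hE hn hd hsub
    have hr := hfix u k' x hb hx
    have h1 := (hr _ he rfl).2 hkd
    simp only [] at h1
    exact pvOle_mono_le h1 (by omega)

-- ---------- the initial table ----------

theorem pvShape_init (n d : Int) :
    pvShape n d ((PySem.List.pyRange 0 n 1).map (fun _ => List.replicate (d + 1).toNat (none : Option Int))) := by
  constructor
  · simp [PySem.List.length_pyRange_one]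
  · intro row hrow
    obtain ⟨_, _, h⟩ := List.mem_map.1 hrow
    simp [← h]

theorem pvDget_init {n d v k : Int} (hin : pvInR n d v k) :
    pvDget ((PySem.List.pyRange 0 n 1).map (fun _ => List.replicate (d + 1).toNat (none : Option Int))) v k = none := by
  have hs := pvShape_init n d
  obtain ⟨hv, hkf⟩ := pvShape_idx hs hin
  have hk := hkf hv
  rw [pvDget_norm hin.1 hin.2.2.1 hv hk]
  have : ((PySem.List.pyRange 0 n 1).map (fun _ => List.replicate (d + 1).toNat (none : Option Int)))[v.toNat] = List.replicate (d + 1).toNat (none : Option Int) := by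
    simp
  simp [this]

-- ---------- B side: one Bellman-Ford micro step ----------

def pvBInv (n : Int) (E : List (Int × Int × Int)) (d : Int) (dist : List (List (Option Int))) : Prop :=
  pvShape n d dist ∧ ∀ v k c, pvInR n d v k → pvDget dist v k = some c → PvAch E d v k c

-- the two relaxation inequalities of one (edge, k) pair
def pvRelCond (d : Int) (dist : List (List (Option Int))) (u v t k : Int) : Prop :=
  ∀ b, pvDget dist u k = some b → pvOle (pvDget dist v k) (b + t) ∧
    (k < d → pvOle (pvDget dist v (k + 1)) (b + PySem.Int.floordiv t 2))

theorem pvLtO_false {c : Int} {o : Option Int} (h : pvLtO c o = false) : pvOle o c := by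
  cases o with
  | none => simp [pvLtO] at h
  | some b => simp [pvLtO] at h; exact ⟨b, rfl, h⟩

theorem pv_neq_true {b : Bool} (h : b = false) : ¬ (b = true) := by simp [h]

theorem pvStepK_spec {n : Int} {E : List (Int × Int × Int)} {d u v t k : Int} (hE : pvValidE n E)
    (hd : 0 ≤ d) (he : (u, v, t) ∈ E) (hk : 0 ≤ k) (hkd : k ≤ d)
    (s : (List (List (Option Int))) × Bool) (hinv : pvBInv n E d s.1) :
    pvBInv n E d (pvStepK d u v t s k).1 ∧ pvDle n d (pvStepK d u v t s k).1 s.1 ∧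
    pvL2le (pvMeas2 (pvStepK d u v t s k).1) (pvMeas2 s.1) ∧
    (s.2 = true → (pvStepK d u v t s k).2 = true) ∧
    ((pvStepK d u v t s k) = s ∧ pvRelCond d s.1 u v t k ∨
      ((pvStepK d u v t s k).2 = true ∧ pvL2lt (pvMeas2 (pvStepK d u v t s k).1) (pvMeas2 s.1))) := by
  have hev := hE _ he
  simp only [] at hev
  obtain ⟨hu0, hun, hv0, hvn, ht0⟩ := hev
  have hin_uk : pvInR n d u k := ⟨hu0, hun, hk, hkd⟩
  have hin_vk : pvInR n d v k := ⟨hv0, hvn, hk, hkd⟩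
  cases hbase : pvDget s.1 u k with
  | none =>
    have hred : pvStepK d u v t s k = s := by
      unfold pvStepK; rw [hbase]
    rw [hred]
    refine ⟨hinv, pvDle_refl _ _ _, pvL2le_refl _, fun h => h, Or.inl ⟨rfl, ?_⟩⟩
    intro b hb; rw [hb] at hbase; cases hbase
  | some base =>
    have hbAch : PvAch E d u k base := hinv.2 u k base hin_uk hbase
    have hb0 : 0 ≤ base := pvAch_nonneg hE hbAch
    have hc10 : 0 ≤ base + t := by omega
    have hfd0 : 0 ≤ PySem.Int.floordiv t 2 := pv_floordiv2_nonneg ht0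
    have hc20 : 0 ≤ base + PySem.Int.floordiv t 2 := by omega
    -- invariant/measure facts for a single cell update
    have upd : ∀ (dist : List (List (Option Int))) (k' : Int), pvBInv n E d dist →
        pvInR n d v k' →
        ∀ c', PvAch E d v k' c' → 0 ≤ c' → pvLtO c' (pvDget dist v k') = true →
        pvBInv n E d (pvDset dist v k' c') ∧ pvDle n d (pvDset dist v k' c') dist ∧
        pvL2lt (pvMeas2 (pvDset dist v k' c')) (pvMeas2 dist) := by
      intro dist k' hinv' hin' c' hach' hc' hlt'
      refine ⟨⟨pvShape_dset hinv'.1 hin' c', ?_⟩, pvDle_dset hinv'.1 hin' hlt',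
        pvMeas2_dset_lt hinv'.1 hin' hc' hlt'⟩
      intro v2 k2 c2 hin2 hget2
      by_cases hsame : v2 = v ∧ k2 = k'
      · obtain ⟨e1, e2⟩ := hsame; subst e1; subst e2
        rw [pvDget_dset_self hinv'.1 hin2 c'] at hget2
        cases hget2
        exact hach'
      · rw [pvDget_dset_ne hinv'.1 hin' hin2 (by tauto) c'] at hget2
        exact hinv'.2 v2 k2 c2 hin2 hget2
    cases hlt1 : pvLtO (base + t) (pvDget s.1 v k) with
    | true =>
      obtain ⟨hinv1, hdle1, hlt1'⟩ := upd s.1 k hinv hin_vk (base + t) (PvAch.step hbAch he) hc10 hlt1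
      cases hdlt : (decide (k < d) && pvLtO (base + PySem.Int.floordiv t 2)
          (pvDget (pvDset s.1 v k (base + t)) v (k + 1))) with
      | true =>
        have hcopy := hdlt
        rw [Bool.and_eq_true] at hcopy
        obtain ⟨hdk, hlt2⟩ := hcopy
        have hklt : k < d := of_decide_eq_true hdk
        have hin_vk1 : pvInR n d v (k + 1) := ⟨hv0, hvn, by omega, by omega⟩
        obtain ⟨hinv2, hdle2, hlt2'⟩ := upd _ (k + 1) hinv1 hin_vk1 _
          (PvAch.stepD hbAch he hklt) hc20 hlt2
        have hred : pvStepK d u v t s k =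
            (pvDset (pvDset s.1 v k (base + t)) v (k + 1) (base + PySem.Int.floordiv t 2), true) := by
          simp only [pvStepK, hbase]
          rw [if_pos hlt1, if_pos hdlt]
        rw [hred]
        exact ⟨hinv2, pvDle_trans hdle2 hdle1,
          pvL2le_trans (pvL2lt_le hlt2') (pvL2lt_le hlt1'), fun _ => rfl,
          Or.inr ⟨rfl, pvL2lt_le_trans hlt2' (pvL2lt_le hlt1')⟩⟩
      | false =>
        have hred : pvStepK d u v t s k = (pvDset s.1 v k (base + t), true) := by
          simp only [pvStepK, hbase]
          rw [if_pos hlt1, if_neg (pv_neq_true hdlt)]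
        rw [hred]
        exact ⟨hinv1, hdle1, pvL2lt_le hlt1', fun _ => rfl, Or.inr ⟨rfl, hlt1'⟩⟩
    | false =>
      cases hdlt : (decide (k < d) && pvLtO (base + PySem.Int.floordiv t 2)
          (pvDget s.1 v (k + 1))) with
      | true =>
        have hcopy := hdlt
        rw [Bool.and_eq_true] at hcopy
        obtain ⟨hdk, hlt2⟩ := hcopy
        have hklt : k < d := of_decide_eq_true hdk
        have hin_vk1 : pvInR n d v (k + 1) := ⟨hv0, hvn, by omega, by omega⟩
        obtain ⟨hinv2, hdle2, hlt2'⟩ := upd s.1 (k + 1) hinv hin_vk1 _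
          (PvAch.stepD hbAch he hklt) hc20 hlt2
        have hred : pvStepK d u v t s k = (pvDset s.1 v (k + 1) (base + PySem.Int.floordiv t 2), true) := by
          simp only [pvStepK, hbase]
          rw [if_neg (pv_neq_true hlt1), if_pos hdlt]
        rw [hred]
        exact ⟨hinv2, hdle2, pvL2lt_le hlt2', fun _ => rfl, Or.inr ⟨rfl, hlt2'⟩⟩
      | false =>
        have hred : pvStepK d u v t s k = s := by
          simp only [pvStepK, hbase]
          rw [if_neg (pv_neq_true hlt1), if_neg (pv_neq_true hdlt)]
        rw [hred]
        refine ⟨hinv, pvDle_refl _ _ _, pvL2le_refl _, fun h => h, Or.inl ⟨rfl, ?_⟩⟩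
        intro b hb
        rw [hb] at hbase
        injection hbase with hbb
        subst hbb
        refine ⟨pvLtO_false hlt1, fun hklt => ?_⟩
        have hdk : decide (k < d) = true := decide_eq_true hklt
        cases hx : pvLtO (b + PySem.Int.floordiv t 2) (pvDget s.1 v (k + 1)) with
        | false => exact pvLtO_false hx
        | true => rw [hdk, hx] at hdlt; simp at hdlt

theorem pvMeasLt2_iff (a b : Nat × Nat) : pvMeasLt2 a b = true ↔ pvL2lt a b := by
  simp [pvMeasLt2, pvL2lt]

theorem pvFoldK_spec {n : Int} {E : List (Int × Int × Int)} {d u v t : Int} (hE : pvValidE n E)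
    (hd : 0 ≤ d) (he : (u, v, t) ∈ E) :
    ∀ (ks : List Int), (∀ k ∈ ks, 0 ≤ k ∧ k ≤ d) →
    ∀ s, pvBInv n E d s.1 →
    pvBInv n E d (ks.foldl (pvStepK d u v t) s).1 ∧
    pvDle n d (ks.foldl (pvStepK d u v t) s).1 s.1 ∧
    pvL2le (pvMeas2 (ks.foldl (pvStepK d u v t) s).1) (pvMeas2 s.1) ∧
    (s.2 = true → (ks.foldl (pvStepK d u v t) s).2 = true) ∧
    ((ks.foldl (pvStepK d u v t) s) = s ∧ (∀ k ∈ ks, pvRelCond d s.1 u v t k) ∨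
      ((ks.foldl (pvStepK d u v t) s).2 = true ∧
        pvL2lt (pvMeas2 (ks.foldl (pvStepK d u v t) s).1) (pvMeas2 s.1))) := by
  intro ks
  induction ks with
  | nil =>
    intro _ s hinv
    exact ⟨hinv, pvDle_refl _ _ _, pvL2le_refl _, fun h => h, Or.inl ⟨rfl, by simp⟩⟩
  | cons k ks ih =>
    intro hks s hinv
    have hk := hks k List.mem_cons_self
    obtain ⟨minv, mdle, mle, mflag, mdisj⟩ := pvStepK_spec hE hd he hk.1 hk.2 s hinv
    have hks' : ∀ k' ∈ ks, 0 ≤ k' ∧ k' ≤ d := fun k' h => hks k' (List.mem_cons_of_mem _ h)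
    obtain ⟨iinv, idle, ile, iflag, idisj⟩ := ih hks' (pvStepK d u v t s k) minv
    simp only [List.foldl_cons]
    refine ⟨iinv, pvDle_trans idle mdle, pvL2le_trans ile mle, fun h => iflag (mflag h), ?_⟩
    rcases mdisj with ⟨meq, mrel⟩ | ⟨mfl, mlt⟩
    · rw [meq] at idisj iinv idle ile iflag ⊢
      rcases idisj with ⟨ieq, irel⟩ | ⟨ifl, ilt⟩
      · refine Or.inl ⟨ieq, ?_⟩
        intro k' hk'
        rcases List.mem_cons.1 hk' with h | h
        · subst h; exact mrel
        · exact irel k' h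
      · exact Or.inr ⟨ifl, ilt⟩
    · exact Or.inr ⟨iflag mfl, pvL2le_lt_trans ile mlt⟩

theorem pvFoldE_spec {n : Int} {E : List (Int × Int × Int)} {d : Int} (hE : pvValidE n E)
    (hd : 0 ≤ d) :
    ∀ (Es : List (Int × Int × Int)), (∀ e ∈ Es, e ∈ E) →
    ∀ s, pvBInv n E d s.1 →
    pvBInv n E d (Es.foldl (fun s e => (PySem.List.pyRange 0 (d + 1) 1).foldl (pvStepK d e.1 e.2.1 e.2.2) s) s).1 ∧
    pvDle n d (Es.foldl (fun s e => (PySem.List.pyRange 0 (d + 1) 1).foldl (pvStepK d e.1 e.2.1 e.2.2) s) s).1 s.1 ∧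
    pvL2le (pvMeas2 (Es.foldl (fun s e => (PySem.List.pyRange 0 (d + 1) 1).foldl (pvStepK d e.1 e.2.1 e.2.2) s) s).1) (pvMeas2 s.1) ∧
    (s.2 = true → (Es.foldl (fun s e => (PySem.List.pyRange 0 (d + 1) 1).foldl (pvStepK d e.1 e.2.1 e.2.2) s) s).2 = true) ∧
    ((Es.foldl (fun s e => (PySem.List.pyRange 0 (d + 1) 1).foldl (pvStepK d e.1 e.2.1 e.2.2) s) s) = s ∧
        (∀ e ∈ Es, ∀ k, 0 ≤ k → k ≤ d → pvRelCond d s.1 e.1 e.2.1 e.2.2 k) ∨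
      ((Es.foldl (fun s e => (PySem.List.pyRange 0 (d + 1) 1).foldl (pvStepK d e.1 e.2.1 e.2.2) s) s).2 = true ∧
        pvL2lt (pvMeas2 (Es.foldl (fun s e => (PySem.List.pyRange 0 (d + 1) 1).foldl (pvStepK d e.1 e.2.1 e.2.2) s) s).1) (pvMeas2 s.1))) := by
  intro Es
  induction Es with
  | nil =>
    intro _ s hinv
    exact ⟨hinv, pvDle_refl _ _ _, pvL2le_refl _, fun h => h, Or.inl ⟨rfl, by simp⟩⟩
  | cons e Es ih =>
    intro hEs s hinv
    have heE : e ∈ E := hEs e List.mem_cons_self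
    have heE' : (e.1, e.2.1, e.2.2) ∈ E := heE
    have hks : ∀ k ∈ PySem.List.pyRange 0 (d + 1) 1, 0 ≤ k ∧ k ≤ d := by
      intro k hk
      have := (PySem.List.mem_pyRange_one).1 hk
      omega
    obtain ⟨minv, mdle, mle, mflag, mdisj⟩ :=
      pvFoldK_spec hE hd heE' (PySem.List.pyRange 0 (d + 1) 1) hks s hinv
    have hEs' : ∀ e' ∈ Es, e' ∈ E := fun e' h => hEs e' (List.mem_cons_of_mem _ h)
    obtain ⟨iinv, idle, ile, iflag, idisj⟩ :=
      ih hEs' ((PySem.List.pyRange 0 (d + 1) 1).foldl (pvStepK d e.1 e.2.1 e.2.2) s) minv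
    simp only [List.foldl_cons]
    refine ⟨iinv, pvDle_trans idle mdle, pvL2le_trans ile mle, fun h => iflag (mflag h), ?_⟩
    rcases mdisj with ⟨meq, mrel⟩ | ⟨mfl, mlt⟩
    · rw [meq] at idisj iinv idle ile iflag ⊢
      rcases idisj with ⟨ieq, irel⟩ | ⟨ifl, ilt⟩
      · refine Or.inl ⟨ieq, ?_⟩
        intro e' he' k hk0 hkd
        rcases List.mem_cons.1 he' with h | h
        · subst h
          exact mrel k (by rw [PySem.List.mem_pyRange_one]; omega)
        · exact irel e' h k hk0 hkd
      · exact Or.inr ⟨ifl, ilt⟩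
    · exact Or.inr ⟨iflag mfl, pvL2le_lt_trans ile mlt⟩

theorem pvSweep_spec {n : Int} {E : List (Int × Int × Int)} {d : Int} (hE : pvValidE n E)
    (hd : 0 ≤ d) (dist : List (List (Option Int))) (hinv : pvBInv n E d dist) :
    pvBInv n E d (pvSweep E d dist).1 ∧ pvDle n d (pvSweep E d dist).1 dist ∧
    ((pvSweep E d dist) = (dist, false) ∧
        (∀ e ∈ E, ∀ k, 0 ≤ k → k ≤ d → pvRelCond d dist e.1 e.2.1 e.2.2 k) ∨
      ((pvSweep E d dist).2 = true ∧ pvL2lt (pvMeas2 (pvSweep E d dist).1) (pvMeas2 dist))) := by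
  obtain ⟨iinv, idle, _, _, idisj⟩ := pvFoldE_spec hE hd E (fun _ h => h) (dist, false) hinv
  exact ⟨iinv, idle, idisj⟩

-- relaxedness of every finite cell, from the per-(edge,k) conditions
theorem pvFix_of_relconds {n : Int} {E : List (Int × Int × Int)} {d : Int}
    {dist : List (List (Option Int))}
    (h : ∀ e ∈ E, ∀ k, 0 ≤ k → k ≤ d → pvRelCond d dist e.1 e.2.1 e.2.2 k) :
    ∀ u k c, pvInR n d u k → pvDget dist u k = some c → pvRelaxedAt E d dist u k c := by
  intro u k c hin hget e he heu
  have hrc := h e he k hin.2.2.1 hin.2.2.2 c (by rw [heu]; exact hget)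
  exact hrc

theorem pvSrc_of_relconds {n : Int} {E : List (Int × Int × Int)} {d : Int}
    {dist : List (List (Option Int))} (hn : 1 ≤ n) (hd : 0 ≤ d)
    (h : ∀ e ∈ E, ∀ k, 0 ≤ k → k ≤ d → pvRelCond d dist e.1 e.2.1 e.2.2 k)
    (hsrc : pvOle (pvDget dist 0 0) 0) :
    pvRelaxedAt E d dist 0 0 0 := by
  intro e he he0
  obtain ⟨b, hb, hb0⟩ := hsrc
  have hrc := h e he 0 (le_refl _) hd b (by rw [he0]; exact hb)
  refine ⟨pvOle_mono_le hrc.1 (by omega), fun hd' => pvOle_mono_le (hrc.2 hd') ?_⟩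
  omega

theorem pvBLoop_spec {n : Int} {E : List (Int × Int × Int)} {d : Int}
    (hE : pvValidE n E) (hn : 1 ≤ n) (hd : 0 ≤ d) :
    ∀ dist, pvBInv n E d dist → pvOle (pvDget dist 0 0) 0 →
    pvBInv n E d (pvBLoop E d dist) ∧ pvOle (pvDget (pvBLoop E d dist) 0 0) 0 ∧
    (∀ u k c, pvInR n d u k → pvDget (pvBLoop E d dist) u k = some c →
      pvRelaxedAt E d (pvBLoop E d dist) u k c) ∧
    pvRelaxedAt E d (pvBLoop E d dist) 0 0 0 := by
  intro dist
  induction dist using pvBLoop.induct E d with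
  | case1 dist r hr hg ih =>
    intro hinv hsrc
    have hr' : (pvSweep E d dist).2 = true := hr
    have hg' : pvMeasLt2 (pvMeasInf (pvSweep E d dist).1, pvMeasSum (pvSweep E d dist).1)
        (pvMeasInf dist, pvMeasSum dist) = true := hg
    obtain ⟨sinv, sdle, sdisj⟩ := pvSweep_spec hE hd dist hinv
    have hsrc' : pvOle (pvDget (pvSweep E d dist).1 0 0) 0 :=
      pvOle_of_dle sdle ⟨le_refl _, by omega, le_refl _, hd⟩ hsrc
    have hres : pvBLoop E d dist = pvBLoop E d (pvSweep E d dist).1 := by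
      rw [pvBLoop.eq_def]
      simp only []
      rw [if_pos hr', dif_pos hg']
    rw [hres]
    exact ih sinv hsrc'
  | case2 dist r hr hg =>
    intro hinv hsrc
    exfalso
    obtain ⟨sinv, sdle, sdisj⟩ := pvSweep_spec hE hd dist hinv
    have hr' : (pvSweep E d dist).2 = true := hr
    have hg' : ¬ (pvMeasLt2 (pvMeasInf (pvSweep E d dist).1, pvMeasSum (pvSweep E d dist).1)
        (pvMeasInf dist, pvMeasSum dist) = true) := hg
    rcases sdisj with ⟨heq, _⟩ | ⟨_, hlt⟩
    · rw [heq] at hr'; simp at hr'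
    · exact hg' ((pvMeasLt2_iff _ _).2 hlt)
  | case3 dist r hr =>
    intro hinv hsrc
    obtain ⟨sinv, sdle, sdisj⟩ := pvSweep_spec hE hd dist hinv
    have hr' : ¬ ((pvSweep E d dist).2 = true) := hr
    rcases sdisj with ⟨heq, hrel⟩ | ⟨hfl, _⟩
    · have hres : pvBLoop E d dist = dist := by
        rw [pvBLoop.eq_def]
        simp only []
        rw [if_neg hr']
        rw [heq]
      rw [hres]
      exact ⟨hinv, hsrc, pvFix_of_relconds hrel, pvSrc_of_relconds hn hd hrel hsrc⟩
    · exact absurd hfl hr'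
-- ---------- A side: heap/Dijkstra loop ----------

theorem pvPop_none {h : List (Int × Int × Int)} (hp : pvPop h = none) : h = [] := by
  cases h with
  | nil => rfl
  | cons x t => simp [pvPop] at hp

theorem pvMeasLt3_iff (a b : Nat × Nat × Nat) : pvMeasLt3 a b = true ↔
    (a.1 < b.1 ∨ (a.1 = b.1 ∧ (a.2.1 < b.2.1 ∨ (a.2.1 = b.2.1 ∧ a.2.2 < b.2.2)))) := by
  simp [pvMeasLt3]

-- heap element wellformedness / table soundness
def pvW1 (n : Int) (E : List (Int × Int × Int)) (d : Int) (heap : List (Int × Int × Int)) : Prop :=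
  ∀ m ∈ heap, 0 ≤ m.1 ∧ 0 ≤ m.2.1 ∧ m.2.1 < n ∧ 0 ≤ m.2.2 ∧ m.2.2 ≤ d ∧
    (m = ((0:Int), (0:Int), (0:Int)) ∨ PvNAch E d m.2.1 m.2.2 m.1)

def pvW2 (n : Int) (E : List (Int × Int × Int)) (d : Int) (dist : List (List (Option Int))) : Prop :=
  ∀ v k c, pvInR n d v k → pvDget dist v k = some c → PvNAch E d v k c

theorem pvRelax_spec {n : Int} {E : List (Int × Int × Int)} {d : Int} (hE : pvValidE n E)
    {city c k : Int} (hc0 : 0 ≤ c) (hk0 : 0 ≤ k) (hkd : k ≤ d)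
    (hAch : (c, city, k) = ((0:Int), (0:Int), (0:Int)) ∨ PvNAch E d city k c)
    {nei t' : Int} (he : (city, nei, t') ∈ E)
    (s : List (Int × Int × Int) × List (List (Option Int)))
    (hsh : pvShape n d s.2) (hW1 : pvW1 n E d s.1) (hW2 : pvW2 n E d s.2) :
    pvShape n d (pvRelax d c k s (nei, t')).2 ∧ pvW1 n E d (pvRelax d c k s (nei, t')).1 ∧
    pvW2 n E d (pvRelax d c k s (nei, t')).2 ∧
    pvDle n d (pvRelax d c k s (nei, t')).2 s.2 ∧
    (∀ m ∈ s.1, m ∈ (pvRelax d c k s (nei, t')).1) ∧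
    (pvRelax d c k s (nei, t') = s ∨ pvL2lt (pvMeas2 (pvRelax d c k s (nei, t')).2) (pvMeas2 s.2)) ∧
    (pvOle (pvDget (pvRelax d c k s (nei, t')).2 nei k) (c + t') ∧
      (k < d → pvOle (pvDget (pvRelax d c k s (nei, t')).2 nei (k + 1)) (c + PySem.Int.floordiv t' 2))) ∧
    (∀ v' k' c', pvInR n d v' k' → pvDget (pvRelax d c k s (nei, t')).2 v' k' = some c' →
      (pvDget s.2 v' k' = some c' ∨ (c', v', k') ∈ (pvRelax d c k s (nei, t')).1)) := by
  have hev := hE _ he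
  simp only [] at hev
  obtain ⟨_, _, hnei0, hnein, ht0⟩ := hev
  have hin_nk : pvInR n d nei k := ⟨hnei0, hnein, hk0, hkd⟩
  have hc10 : 0 ≤ c + t' := by omega
  have hfd0 : 0 ≤ PySem.Int.floordiv t' 2 := pv_floordiv2_nonneg ht0
  have hc20 : 0 ≤ c + PySem.Int.floordiv t' 2 := by omega
  have hach1 : PvNAch E d nei k (c + t') := by
    rcases hAch with h | h
    · injection h with h1 h2
      injection h2 with h2 h3
      subst h1; subst h2; subst h3
      simpa using PvNAch.base he
    · exact PvNAch.step h he
  have hach2 : k < d → PvNAch E d nei (k + 1) (c + PySem.Int.floordiv t' 2) := by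
    intro hklt
    rcases hAch with h | h
    · injection h with h1 h2
      injection h2 with h2 h3
      subst h1; subst h2; subst h3
      simpa using PvNAch.baseD he (by omega)
    · exact PvNAch.stepD h he hklt
  -- a single guarded update with its push
  have upd : ∀ (heap : List (Int × Int × Int)) (dist : List (List (Option Int))) (k' c' : Int),
      pvInR n d nei k' → pvW1 n E d heap → pvW2 n E d dist → pvShape n d dist →
      PvNAch E d nei k' c' → 0 ≤ c' → pvLtO c' (pvDget dist nei k') = true →
      pvShape n d (pvDset dist nei k' c') ∧ pvW1 n E d (heap ++ [(c', nei, k')]) ∧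
      pvW2 n E d (pvDset dist nei k' c') ∧ pvDle n d (pvDset dist nei k' c') dist ∧
      pvL2lt (pvMeas2 (pvDset dist nei k' c')) (pvMeas2 dist) ∧
      (∀ m ∈ heap, m ∈ heap ++ [(c', nei, k')]) ∧
      pvDget (pvDset dist nei k' c') nei k' = some c' ∧
      (∀ v2 k2 c2, pvInR n d v2 k2 → pvDget (pvDset dist nei k' c') v2 k2 = some c2 →
        (pvDget dist v2 k2 = some c2 ∨ (c2, v2, k2) ∈ heap ++ [(c', nei, k')])) := by
    intro heap dist k' c' hin' hW1' hW2' hsh' hach' hc' hlt'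
    refine ⟨pvShape_dset hsh' hin' c', ?_, ?_, pvDle_dset hsh' hin' hlt',
      pvMeas2_dset_lt hsh' hin' hc' hlt', fun m hm => List.mem_append_left _ hm,
      pvDget_dset_self hsh' hin' c', ?_⟩
    · intro m hm
      rcases List.mem_append.1 hm with hm | hm
      · exact hW1' m hm
      · rw [List.mem_singleton] at hm
        subst hm
        exact ⟨hc', hin'.1, hin'.2.1, hin'.2.2.1, hin'.2.2.2, Or.inr hach'⟩
    · intro v2 k2 c2 hin2 hget2
      by_cases hsame : v2 = nei ∧ k2 = k'
      · obtain ⟨e1, e2⟩ := hsame; subst e1; subst e2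
        rw [pvDget_dset_self hsh' hin2 c'] at hget2
        cases hget2
        exact hach'
      · rw [pvDget_dset_ne hsh' hin' hin2 (by tauto) c'] at hget2
        exact hW2' v2 k2 c2 hin2 hget2
    · intro v2 k2 c2 hin2 hget2
      by_cases hsame : v2 = nei ∧ k2 = k'
      · obtain ⟨e1, e2⟩ := hsame; subst e1; subst e2
        rw [pvDget_dset_self hsh' hin2 c'] at hget2
        cases hget2
        exact Or.inr (List.mem_append_right _ List.mem_cons_self)
      · rw [pvDget_dset_ne hsh' hin' hin2 (by tauto) c'] at hget2
        exact Or.inl hget2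
  cases hlt1 : pvLtO (c + t') (pvDget s.2 nei k) with
  | true =>
    obtain ⟨ush, uW1, uW2, udle, ult, usup, uget, upush⟩ :=
      upd s.1 s.2 k (c + t') hin_nk hW1 hW2 hsh hach1 hc10 hlt1
    cases hdlt : (decide (k < d) && pvLtO (c + PySem.Int.floordiv t' 2)
        (pvDget (pvDset s.2 nei k (c + t')) nei (k + 1))) with
    | true =>
      have hcopy := hdlt
      rw [Bool.and_eq_true] at hcopy
      obtain ⟨hdk, hlt2⟩ := hcopy
      have hklt : k < d := of_decide_eq_true hdk
      have hin_nk1 : pvInR n d nei (k + 1) := ⟨hnei0, hnein, by omega, by omega⟩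
      obtain ⟨ush2, uW12, uW22, udle2, ult2, usup2, uget2, upush2⟩ :=
        upd (s.1 ++ [(c + t', nei, k)]) (pvDset s.2 nei k (c + t')) (k + 1)
          (c + PySem.Int.floordiv t' 2) hin_nk1 uW1 uW2 ush (hach2 hklt) hc20 hlt2
      have hred : pvRelax d c k s (nei, t') =
          ((s.1 ++ [(c + t', nei, k)]) ++ [(c + PySem.Int.floordiv t' 2, nei, k + 1)],
            pvDset (pvDset s.2 nei k (c + t')) nei (k + 1) (c + PySem.Int.floordiv t' 2)) := by
        simp only [pvRelax]
        rw [if_pos hlt1, if_pos hdlt]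
      rw [hred]
      refine ⟨ush2, uW12, uW22, pvDle_trans udle2 udle, ?_, ?_, ⟨?_, fun _ => uget2 ▸ ⟨_, rfl, le_refl _⟩⟩, ?_⟩
      · intro m hm
        exact usup2 _ (usup _ hm)
      · exact Or.inr (pvL2lt_le_trans ult2 (pvL2lt_le ult))
      · rw [pvDget_dset_ne ush hin_nk1 hin_nk (by right; omega) _]
        rw [uget]
        exact ⟨_, rfl, le_refl _⟩
      · intro v2 k2 c2 hin2 hget2
        rcases upush2 v2 k2 c2 hin2 hget2 with h | h
        · rcases upush v2 k2 c2 hin2 h with h' | h'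
          · exact Or.inl h'
          · exact Or.inr (List.mem_append_left _ h')
        · exact Or.inr h
    | false =>
      have hred : pvRelax d c k s (nei, t') =
          (s.1 ++ [(c + t', nei, k)], pvDset s.2 nei k (c + t')) := by
        simp only [pvRelax]
        rw [if_pos hlt1, if_neg (pv_neq_true hdlt)]
      rw [hred]
      refine ⟨ush, uW1, uW2, udle, usup, Or.inr ult, ⟨uget ▸ ⟨_, rfl, le_refl _⟩, ?_⟩, upush⟩
      intro hklt
      have hdk : decide (k < d) = true := decide_eq_true hklt
      cases hx : pvLtO (c + PySem.Int.floordiv t' 2) (pvDget (pvDset s.2 nei k (c + t')) nei (k + 1)) with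
      | false => exact pvLtO_false hx
      | true => rw [hdk, hx] at hdlt; simp at hdlt
  | false =>
    cases hdlt : (decide (k < d) && pvLtO (c + PySem.Int.floordiv t' 2)
        (pvDget s.2 nei (k + 1))) with
    | true =>
      have hcopy := hdlt
      rw [Bool.and_eq_true] at hcopy
      obtain ⟨hdk, hlt2⟩ := hcopy
      have hklt : k < d := of_decide_eq_true hdk
      have hin_nk1 : pvInR n d nei (k + 1) := ⟨hnei0, hnein, by omega, by omega⟩
      obtain ⟨ush2, uW12, uW22, udle2, ult2, usup2, uget2, upush2⟩ :=
        upd s.1 s.2 (k + 1) (c + PySem.Int.floordiv t' 2) hin_nk1 hW1 hW2 hsh (hach2 hklt) hc20 hlt2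
      have hred : pvRelax d c k s (nei, t') =
          (s.1 ++ [(c + PySem.Int.floordiv t' 2, nei, k + 1)],
            pvDset s.2 nei (k + 1) (c + PySem.Int.floordiv t' 2)) := by
        simp only [pvRelax]
        rw [if_neg (pv_neq_true hlt1), if_pos hdlt]
      rw [hred]
      refine ⟨ush2, uW12, uW22, udle2, usup2, Or.inr ult2, ⟨?_, fun _ => uget2 ▸ ⟨_, rfl, le_refl _⟩⟩, upush2⟩
      rw [pvDget_dset_ne hsh hin_nk1 hin_nk (by right; omega) _]
      exact pvLtO_false hlt1
    | false =>
      have hred : pvRelax d c k s (nei, t') = s := by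
        simp only [pvRelax]
        rw [if_neg (pv_neq_true hlt1), if_neg (pv_neq_true hdlt)]
      rw [hred]
      refine ⟨hsh, hW1, hW2, pvDle_refl _ _ _, fun m hm => hm, Or.inl rfl,
        ⟨pvLtO_false hlt1, ?_⟩, fun v2 k2 c2 _ hg => Or.inl hg⟩
      intro hklt
      have hdk : decide (k < d) = true := decide_eq_true hklt
      cases hx : pvLtO (c + PySem.Int.floordiv t' 2) (pvDget s.2 nei (k + 1)) with
      | false => exact pvLtO_false hx
      | true => rw [hdk, hx] at hdlt; simp at hdlt

theorem pvRelaxFold_spec {n : Int} {E : List (Int × Int × Int)} {d : Int} (hE : pvValidE n E)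
    {city c k : Int} (hc0 : 0 ≤ c) (hk0 : 0 ≤ k) (hkd : k ≤ d)
    (hAch : (c, city, k) = ((0:Int), (0:Int), (0:Int)) ∨ PvNAch E d city k c) :
    ∀ (L : List (Int × Int)), (∀ vt ∈ L, (city, vt.1, vt.2) ∈ E) →
    ∀ s : List (Int × Int × Int) × List (List (Option Int)),
      pvShape n d s.2 → pvW1 n E d s.1 → pvW2 n E d s.2 →
    pvShape n d (L.foldl (pvRelax d c k) s).2 ∧ pvW1 n E d (L.foldl (pvRelax d c k) s).1 ∧
    pvW2 n E d (L.foldl (pvRelax d c k) s).2 ∧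
    pvDle n d (L.foldl (pvRelax d c k) s).2 s.2 ∧
    (∀ m ∈ s.1, m ∈ (L.foldl (pvRelax d c k) s).1) ∧
    ((L.foldl (pvRelax d c k) s) = s ∨ pvL2lt (pvMeas2 (L.foldl (pvRelax d c k) s).2) (pvMeas2 s.2)) ∧
    (∀ vt ∈ L, pvOle (pvDget (L.foldl (pvRelax d c k) s).2 vt.1 k) (c + vt.2) ∧
      (k < d → pvOle (pvDget (L.foldl (pvRelax d c k) s).2 vt.1 (k + 1)) (c + PySem.Int.floordiv vt.2 2))) ∧
    (∀ v' k' c', pvInR n d v' k' → pvDget (L.foldl (pvRelax d c k) s).2 v' k' = some c' →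
      (pvDget s.2 v' k' = some c' ∨ (c', v', k') ∈ (L.foldl (pvRelax d c k) s).1)) := by
  intro L
  induction L with
  | nil =>
    intro _ s hsh hW1 hW2
    exact ⟨hsh, hW1, hW2, pvDle_refl _ _ _, fun m hm => hm, Or.inl rfl, by simp,
      fun _ _ _ _ hg => Or.inl hg⟩
  | cons vt L ih =>
    intro hL s hsh hW1 hW2
    have hvt : (city, vt.1, vt.2) ∈ E := hL vt List.mem_cons_self
    have hev := hE _ hvt
    simp only [] at hev
    obtain ⟨_, _, hv0, hvn, ht0⟩ := hev
    obtain ⟨msh, mW1, mW2, mdle, msup, mdisj, mrel, mpush⟩ :=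
      pvRelax_spec hE hc0 hk0 hkd hAch hvt s hsh hW1 hW2
    have hL' : ∀ vt' ∈ L, (city, vt'.1, vt'.2) ∈ E := fun vt' h => hL vt' (List.mem_cons_of_mem _ h)
    obtain ⟨ish, iW1, iW2, idle, isup, idisj, irel, ipush⟩ :=
      ih hL' (pvRelax d c k s (vt.1, vt.2)) msh mW1 mW2
    have hvt_eta : pvRelax d c k s vt = pvRelax d c k s (vt.1, vt.2) := rfl
    simp only [List.foldl_cons, hvt_eta]
    refine ⟨ish, iW1, iW2, pvDle_trans idle mdle, fun m hm => isup _ (msup _ hm), ?_, ?_, ?_⟩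
    · rcases mdisj with meq | mlt
      · rw [meq] at idisj ⊢
        exact idisj
      · rcases idisj with ieq | ilt
        · rw [ieq]
          exact Or.inr mlt
        · exact Or.inr (pvL2lt_le_trans ilt (pvL2lt_le mlt))
    · intro vt' hvt'
      rcases List.mem_cons.1 hvt' with h | h
      · subst h
        refine ⟨pvOle_of_dle idle ⟨hv0, hvn, hk0, hkd⟩ mrel.1, fun hklt => ?_⟩
        exact pvOle_of_dle idle ⟨hv0, hvn, by omega, by omega⟩ (mrel.2 hklt)
      · exact irel vt' h
    · intro v' k' c' hin' hget'
      rcases ipush v' k' c' hin' hget' with h | h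
      · rcases mpush v' k' c' hin' h with h' | h'
        · exact Or.inl h'
        · exact Or.inr (isup _ h')
      · exact Or.inr h

theorem pvALoop_spec {n : Int} {E : List (Int × Int × Int)} {d : Int}
    {adj : PySem.Dict Int (List (Int × Int))}
    (hE : pvValidE n E) (hn : 1 ≤ n) (hd : 0 ≤ d)
    (hadj : ∀ u, 0 ≤ u → u < n → ∀ vt : Int × Int, vt ∈ pvAdjGet adj u ↔ (u, vt.1, vt.2) ∈ E) :
    ∀ heap dist, pvShape n d dist → pvW1 n E d heap → pvW2 n E d dist →
      (∀ v k c, pvInR n d v k → pvDget dist v k = some c →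
        ((c, v, k) ∈ heap ∨ pvRelaxedAt E d dist v k c)) →
      (((0:Int), (0:Int), (0:Int)) ∈ heap ∨ pvRelaxedAt E d dist 0 0 0) →
      pvShape n d (pvALoop adj d heap dist) ∧ pvW2 n E d (pvALoop adj d heap dist) ∧
      (∀ u k c, pvInR n d u k → pvDget (pvALoop adj d heap dist) u k = some c →
        pvRelaxedAt E d (pvALoop adj d heap dist) u k c) ∧
      pvRelaxedAt E d (pvALoop adj d heap dist) 0 0 0 := by
  intro heap dist
  induction heap, dist using pvALoop.induct adj d with
  | case1 heap dist hp =>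
    intro hsh hW1 hW2 hW3 hW4
    have hheap := pvPop_none hp
    subst hheap
    have hres : pvALoop adj d [] dist = dist := by
      rw [pvALoop.eq_def]
      rw [show pvPop [] = none from rfl]
    rw [hres]
    refine ⟨hsh, hW2, ?_, ?_⟩
    · intro u k c hin hget
      rcases hW3 u k c hin hget with h | h
      · simp at h
      · exact h
    · rcases hW4 with h | h
      · simp at h
      · exact h
  | case2 heap dist c city k rest hp hgt ih =>
    intro hsh hW1 hW2 hW3 hW4
    obtain ⟨hm, hrest⟩ := pvPop_mem hp
    obtain ⟨x, hx, hxc⟩ : ∃ x, pvDget dist city k = some x ∧ x < c := by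
      cases hg : pvDget dist city k with
      | none => rw [hg] at hgt; simp [pvGtO] at hgt
      | some y => rw [hg] at hgt; simp [pvGtO] at hgt; exact ⟨y, rfl, hgt⟩
    have hres : pvALoop adj d heap dist = pvALoop adj d rest dist := by
      rw [pvALoop.eq_def, hp]
      simp only []
      rw [if_pos hgt]
    rw [hres]
    have hmW1 := hW1 _ hm
    simp only [] at hmW1
    obtain ⟨hc0, hcity0, hcityn, hk0, hkd, hach⟩ := hmW1
    apply ih
    · exact hsh
    · intro m hm'
      exact hW1 m (List.erase_subset (hrest ▸ hm'))
    · exact hW2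
    · intro v' k' c' hin' hget'
      rcases hW3 v' k' c' hin' hget' with h | h
      · left
        rw [hrest]
        apply List.mem_erase_of_ne _ |>.2 h
        intro heq
        injection heq with e1 e2
        injection e2 with e2 e3
        subst e1; subst e2; subst e3
        rw [hget'] at hx
        injection hx with hx
        omega
      · exact Or.inr h
    · rcases hW4 with h | h
      · left
        rw [hrest]
        apply List.mem_erase_of_ne _ |>.2 h
        intro heq
        injection heq with e1 e2
        injection e2 with e2 e3
        rw [← e1] at hxc
        rw [← e2, ← e3] at hx
        have hnach := hW2 0 0 x ⟨le_refl _, by omega, le_refl _, hd⟩ hx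
        have := pvNAch_nonneg hE hnach
        omega
      · exact Or.inr h
  | case3 heap dist c city k rest hp hgt s hg ih =>
    intro hsh hW1 hW2 hW3 hW4
    obtain ⟨hm, hrest⟩ := pvPop_mem hp
    have hmW1 := hW1 _ hm
    simp only [] at hmW1
    obtain ⟨hc0, hcity0, hcityn, hk0, hkd, hach⟩ := hmW1
    have hW1r : pvW1 n E d rest := fun m hm' => hW1 m (List.erase_subset (hrest ▸ hm'))
    have hL : ∀ vt ∈ pvAdjGet adj city, (city, vt.1, vt.2) ∈ E :=
      fun vt h => (hadj city hcity0 hcityn vt).1 h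
    obtain ⟨fsh, fW1, fW2, fdle, fsup, fdisj, frel, fpush⟩ :=
      pvRelaxFold_spec hE hc0 hk0 hkd hach (pvAdjGet adj city) hL (rest, dist) hsh hW1r hW2
    have hcov : ∀ e ∈ E, e.1 = city → (e.2.1, e.2.2) ∈ pvAdjGet adj city := by
      intro e he heq
      apply (hadj city hcity0 hcityn (e.2.1, e.2.2)).2
      simpa [← heq] using he
    have hrelax : pvRelaxedAt E d ((pvAdjGet adj city).foldl (pvRelax d c k) (rest, dist)).2 city k c := by
      intro e he heq
      exact frel (e.2.1, e.2.2) (hcov e he heq)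
    have hres : pvALoop adj d heap dist =
        pvALoop adj d ((pvAdjGet adj city).foldl (pvRelax d c k) (rest, dist)).1
          ((pvAdjGet adj city).foldl (pvRelax d c k) (rest, dist)).2 := by
      rw [pvALoop.eq_def, hp]
      simp only []
      rw [if_neg hgt, dif_pos hg]
    rw [hres]
    apply ih
    · exact fsh
    · exact fW1
    · exact fW2
    · intro v' k' c' hin' hget'
      rcases fpush v' k' c' hin' hget' with hold | hnew
      · rcases hW3 v' k' c' hin' hold with hh | hh
        · by_cases hmm : (c', v', k') = (c, city, k)
          · right
            injection hmm with e1 e2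
            injection e2 with e2 e3
            subst e1; subst e2; subst e3
            exact hrelax
          · left
            exact fsup _ (hrest ▸ List.mem_erase_of_ne hmm |>.2 hh)
        · exact Or.inr (pvRelaxedAt_of_dle hE fdle hin'.2.2.1 hin'.2.2.2 hh)
      · exact Or.inl hnew
    · by_cases hmm : ((0:Int), (0:Int), (0:Int)) = ((c:Int), city, k)
      · right
        injection hmm with e1 e2
        injection e2 with e2 e3
        have ec := e1.symm
        have ecity := e2.symm
        have ek := e3.symm
        subst ec; subst ecity; subst ek
        exact hrelax
      · rcases hW4 with h | h
        · left
          exact fsup _ (hrest ▸ List.mem_erase_of_ne hmm |>.2 h)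
        · exact Or.inr (pvRelaxedAt_of_dle hE fdle (le_refl _) hd h)
  | case4 heap dist c city k rest hp hgt s hg =>
    intro hsh hW1 hW2 hW3 hW4
    exfalso
    obtain ⟨hm, hrest⟩ := pvPop_mem hp
    have hmW1 := hW1 _ hm
    simp only [] at hmW1
    obtain ⟨hc0, hcity0, hcityn, hk0, hkd, hach⟩ := hmW1
    have hW1r : pvW1 n E d rest := fun m hm' => hW1 m (List.erase_subset (hrest ▸ hm'))
    have hL : ∀ vt ∈ pvAdjGet adj city, (city, vt.1, vt.2) ∈ E :=
      fun vt h => (hadj city hcity0 hcityn vt).1 h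
    obtain ⟨fsh, fW1, fW2, fdle, fsup, fdisj, frel, fpush⟩ :=
      pvRelaxFold_spec hE hc0 hk0 hkd hach (pvAdjGet adj city) hL (rest, dist) hsh hW1r hW2
    apply hg
    rcases fdisj with feq | flt
    · show pvMeasLt3 (pvMeasInf (List.foldl (pvRelax d c k) (rest, dist) (pvAdjGet adj city)).2,
          pvMeasSum (List.foldl (pvRelax d c k) (rest, dist) (pvAdjGet adj city)).2,
          (List.foldl (pvRelax d c k) (rest, dist) (pvAdjGet adj city)).1.length)
          (pvMeasInf dist, pvMeasSum dist, heap.length) = true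
      rw [feq]
      rw [pvMeasLt3_iff]
      right
      refine ⟨rfl, Or.inr ⟨rfl, ?_⟩⟩
      show rest.length < heap.length
      rw [hrest, List.length_erase_of_mem hm]
      have := List.length_pos_of_mem hm
      omega
    · show pvMeasLt3 (pvMeasInf (List.foldl (pvRelax d c k) (rest, dist) (pvAdjGet adj city)).2,
          pvMeasSum (List.foldl (pvRelax d c k) (rest, dist) (pvAdjGet adj city)).2,
          (List.foldl (pvRelax d c k) (rest, dist) (pvAdjGet adj city)).1.length)
          (pvMeasInf dist, pvMeasSum dist, heap.length) = true
      rw [pvMeasLt3_iff]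
      unfold pvL2lt pvMeas2 at flt
      rcases flt with h | ⟨h1, h2⟩
      · exact Or.inl h
      · exact Or.inr ⟨h1, Or.inl h2⟩

-- ---------- the edge list and A's adjacency dict ----------

def pvRowEdges (row : List Int) : List (Int × Int × Int) :=
  match row with
  | [u, v, t] => [(u, v, t), (v, u, t)]
  | _ => []

theorem pvEdges_eq_flatMap (hw : List (List Int)) : pvEdges hw = hw.flatMap pvRowEdges := by
  have key : ∀ (l : List (List Int)) (acc : List (Int × Int × Int)),
      l.foldl (fun acc row => pvRowCase acc (fun u v t => acc ++ [(u, v, t), (v, u, t)]) row) acc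
        = acc ++ l.flatMap pvRowEdges := by
    intro l
    induction l with
    | nil => intro acc; simp
    | cons row rest ih =>
      intro acc
      rw [List.foldl_cons, List.flatMap_cons, ih]
      have hrow : pvRowCase acc (fun u v t => acc ++ [(u, v, t), (v, u, t)]) row
          = acc ++ pvRowEdges row := by
        match row with
        | [] => simp [pvRowEdges, pvRowCase]
        | [_] => simp [pvRowEdges, pvRowCase]
        | [_, _] => simp [pvRowEdges, pvRowCase]
        | [u, v, t] => simp [pvRowEdges, pvRowCase]
        | _ :: _ :: _ :: _ :: _ => simp [pvRowEdges, pvRowCase]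
      rw [hrow, List.append_assoc]
  exact key hw []

theorem pvEdges_valid {n : Int} {hw : List (List Int)} {discounts : Int}
    (hpre : Pre_minimumCost2 n hw discounts) : pvValidE n (pvEdges hw) := by
  intro e he
  rw [pvEdges_eq_flatMap, List.mem_flatMap] at he
  obtain ⟨row, hrow, hmem⟩ := he
  have hp := hpre.2.2 row hrow
  match row, hp with
  | [u, v, t], hp =>
    simp [pvRowEdges] at hmem
    simp [List.getD] at hp
    rcases hmem with h | h <;> (subst h; simp only []; omega)

-- a row's tolls, as they appear in the edges
theorem pv_mem_pvEdges_toll {n : Int} {hw : List (List Int)} {discounts : Int}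
    (hpre : Pre_minimumCost2 n hw discounts) {e : Int × Int × Int} (he : e ∈ pvEdges hw) :
    ∃ row ∈ hw, row.getD 2 0 = e.2.2 := by
  rw [pvEdges_eq_flatMap, List.mem_flatMap] at he
  obtain ⟨row, hrow, hmem⟩ := he
  refine ⟨row, hrow, ?_⟩
  have hp := hpre.2.2 row hrow
  match row, hp with
  | [u, v, t], hp =>
    simp [pvRowEdges] at hmem
    rcases hmem with h | h <;> (subst h; simp [List.getD])

def pvRowPairs (row : List Int) : List (Int × (Int × Int)) :=
  match row with
  | [u, v, t] => [(u, (v, t)), (v, (u, t))]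
  | _ => []

theorem pvAdj_eq (hw : List (List Int)) (acc : PySem.Dict Int (List (Int × Int))) :
    hw.foldl (fun acc row =>
      pvRowCase acc (fun u v t => (acc.modify u [] (· ++ [(v, t)])).modify v [] (· ++ [(u, t)])) row) acc
    = (hw.flatMap pvRowPairs).foldl (fun dct p => dct.modify p.1 [] (· ++ [p.2])) acc := by
  induction hw generalizing acc with
  | nil => simp
  | cons row rest ih =>
    rw [List.foldl_cons, List.flatMap_cons, List.foldl_append, ih]
    congr 1
    match row with
    | [] => simp [pvRowPairs, pvRowCase]
    | [_] => simp [pvRowPairs, pvRowCase]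
    | [_, _] => simp [pvRowPairs, pvRowCase]
    | [u, v, t] => simp [pvRowPairs, pvRowCase]
    | _ :: _ :: _ :: _ :: _ => simp [pvRowPairs, pvRowCase]

theorem pvAdj0_getD (n u : Int) :
    ((PySem.List.pyRange 0 n 1).foldl (fun acc i => acc.insert i ([] : List (Int × Int)))
      PySem.Dict.empty).getD u [] = [] := by
  have key : ∀ (l : List Int) (acc : PySem.Dict Int (List (Int × Int))),
      (∀ u', acc.getD u' [] = []) →
      (l.foldl (fun acc i => acc.insert i ([] : List (Int × Int))) acc).getD u [] = [] := by
    intro l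
    induction l with
    | nil => intro acc h; exact h u
    | cons i rest ih =>
      intro acc h
      rw [List.foldl_cons]
      apply ih
      intro u'
      rw [PySem.Dict.getD_insert]
      split <;> simp [h]
  apply key
  intro u'
  rfl

theorem pv_mem_rowPairs_iff (row : List Int) (a : Int) (bc : Int × Int) :
    (a, bc) ∈ pvRowPairs row ↔ (a, bc.1, bc.2) ∈ pvRowEdges row := by
  match row with
  | [] => simp [pvRowPairs, pvRowEdges]
  | [_] => simp [pvRowPairs, pvRowEdges]
  | [_, _] => simp [pvRowPairs, pvRowEdges]
  | [u, v, t] => simp [pvRowPairs, pvRowEdges, Prod.ext_iff]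
  | _ :: _ :: _ :: _ :: _ => simp [pvRowPairs, pvRowEdges]

theorem pvAdjGet_char (n : Int) (hw : List (List Int)) (u : Int) (vt : Int × Int) :
    vt ∈ pvAdjGet (hw.foldl (fun acc row =>
      pvRowCase acc (fun u v t => (acc.modify u [] (· ++ [(v, t)])).modify v [] (· ++ [(u, t)])) row)
      ((PySem.List.pyRange 0 n 1).foldl (fun acc i => acc.insert i ([] : List (Int × Int)))
        PySem.Dict.empty)) u
    ↔ (u, vt.1, vt.2) ∈ pvEdges hw := by
  rw [pvEdges_eq_flatMap]
  have : pvAdjGet (hw.foldl (fun acc row =>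
      pvRowCase acc (fun u v t => (acc.modify u [] (· ++ [(v, t)])).modify v [] (· ++ [(u, t)])) row)
      ((PySem.List.pyRange 0 n 1).foldl (fun acc i => acc.insert i ([] : List (Int × Int)))
        PySem.Dict.empty)) u
      = ((hw.flatMap pvRowPairs).filter (fun p => p.1 == u)).map (fun p => p.2) := by
    show PySem.Dict.getD _ u [] = _
    rw [pvAdj_eq]
    rw [PySem.Dict.getD_foldl_modify_append]
    rw [pvAdj0_getD]
    simp
  rw [this]
  constructor
  · intro h
    rw [List.mem_map] at h
    obtain ⟨p, hp, hpe⟩ := h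
    rw [List.mem_filter] at hp
    obtain ⟨hp1, hp2⟩ := hp
    rw [List.mem_flatMap] at hp1
    obtain ⟨row, hrow, hmem⟩ := hp1
    rw [List.mem_flatMap]
    refine ⟨row, hrow, ?_⟩
    have hpu : p.1 = u := by simpa using hp2
    have : p = (u, vt) := by
      rw [Prod.ext_iff]
      exact ⟨hpu, hpe⟩
    rw [this] at hmem
    exact (pv_mem_rowPairs_iff row u vt).1 hmem
  · intro h
    rw [List.mem_flatMap] at h
    obtain ⟨row, hrow, hmem⟩ := h
    rw [List.mem_map]
    refine ⟨(u, vt), ?_, rfl⟩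
    rw [List.mem_filter]
    refine ⟨?_, by simp⟩
    rw [List.mem_flatMap]
    exact ⟨row, hrow, (pv_mem_rowPairs_iff row u vt).2 hmem⟩

-- ---------- comparing the two final tables ----------

theorem pvCell_eq {n : Int} {E : List (Int × Int × Int)} {d : Int}
    {TA TB : List (List (Option Int))}
    (hW2A : pvW2 n E d TA)
    (hlowA : ∀ v k c, PvNAch E d v k c → pvOle (pvDget TA v k) c)
    (hsoundB : ∀ v k c, pvInR n d v k → pvDget TB v k = some c → PvAch E d v k c)
    (hlowB : ∀ v k c, PvAch E d v k c → pvOle (pvDget TB v k) c)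
    {v k : Int} (hin : pvInR n d v k) (hvk : ¬ (v = 0 ∧ k = 0)) :
    pvDget TA v k = pvDget TB v k := by
  cases ha : pvDget TA v k with
  | some ca =>
    have hnca := hW2A v k ca hin ha
    obtain ⟨cb, hb, hba⟩ := hlowB _ _ _ (pvNAch_ach hnca)
    have hachb := hsoundB v k cb hin hb
    rcases pvAch_cases hachb with ⟨e1, e2, _⟩ | hnb
    · exact absurd ⟨e1, e2⟩ hvk
    · obtain ⟨ca', ha', hab⟩ := hlowA _ _ _ hnb
      rw [ha] at ha'
      injection ha' with ha'
      rw [hb]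
      congr 1
      omega
  | none =>
    cases hb : pvDget TB v k with
    | none => rfl
    | some cb =>
      have hachb := hsoundB v k cb hin hb
      rcases pvAch_cases hachb with ⟨e1, e2, _⟩ | hnb
      · exact absurd ⟨e1, e2⟩ hvk
      · obtain ⟨ca', ha', _⟩ := hlowA _ _ _ hnb
        rw [ha] at ha'
        cases ha'

theorem pvRow_spec {n d : Int} {T : List (List (Option Int))} (hn : 1 ≤ n) (hs : pvShape n d T) :
    ∃ (h1 : (n - 1).toNat < T.length),
      (PySem.List.pyGet? T (n - 1)).getD [] = T[(n - 1).toNat] := by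
  have h1 : (n - 1).toNat < T.length := by rw [hs.1]; omega
  exact ⟨h1, by rw [PySem.List.pyGet?_of_nonneg _ (by omega), List.getElem?_eq_getElem h1,
    Option.getD_some]⟩

theorem pvAnswer_congr {n d : Int} {TA TB : List (List (Option Int))}
    (hn : 1 ≤ n) (hd : 0 ≤ d) (hsA : pvShape n d TA) (hsB : pvShape n d TB)
    (hcell : ∀ k : Int, 0 ≤ k → k ≤ d → pvDget TA (n - 1) k = pvDget TB (n - 1) k) :
    pvAnswer TA n = pvAnswer TB n := by
  obtain ⟨hA1, hAeq⟩ := pvRow_spec hn hsA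
  obtain ⟨hB1, hBeq⟩ := pvRow_spec hn hsB
  have hlenA : (TA[(n - 1).toNat]).length = (d + 1).toNat := hsA.2 _ (List.getElem_mem _)
  have hlenB : (TB[(n - 1).toNat]).length = (d + 1).toNat := hsB.2 _ (List.getElem_mem _)
  have hrows : TA[(n - 1).toNat] = TB[(n - 1).toNat] := by
    apply List.ext_getElem (by rw [hlenA, hlenB])
    intro i hiA hiB
    have hkA : ((i : Int)).toNat < (TA[(n - 1).toNat]).length := by
      simpa using hiA
    have hkB : ((i : Int)).toNat < (TB[(n - 1).toNat]).length := by
      simpa using hiB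
    have e1 := pvDget_norm (dist := TA) (v := n - 1) (k := (i : Int)) (by omega)
      (Int.natCast_nonneg i) hA1 hkA
    have e2 := pvDget_norm (dist := TB) (v := n - 1) (k := (i : Int)) (by omega)
      (Int.natCast_nonneg i) hB1 hkB
    simp only [Int.toNat_natCast] at e1 e2
    rw [← e1, ← e2]
    apply hcell
    · omega
    · rw [hlenA] at hiA; omega
  unfold pvAnswer
  rw [hAeq, hBeq, hrows]

-- ---------- the running min over a row ----------

theorem pvOMin_acc_le : ∀ (row : List (Option Int)) (a : Int),
    ∃ x, row.foldl pvOMin (some a) = some x ∧ x ≤ a := by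
  intro row
  induction row with
  | nil => intro a; exact ⟨a, rfl, le_refl _⟩
  | cons o rest ih =>
    intro a
    cases o with
    | none => simpa [pvOMin] using ih a
    | some b =>
      obtain ⟨x, hx, hxa⟩ := ih (min a b)
      refine ⟨x, by simpa [pvOMin] using hx, le_trans hxa (min_le_left _ _)⟩

theorem pv_foldMin_le : ∀ (row : List (Option Int)) (acc : Option Int) (c0 : Int),
    some c0 ∈ row → ∃ x, row.foldl pvOMin acc = some x ∧ x ≤ c0 := by
  intro row
  induction row with
  | nil => intro acc c0 h; simp at h
  | cons o rest ih =>
    intro acc c0 h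
    rcases List.mem_cons.1 h with h | h
    · rw [← h]
      cases acc with
      | none =>
        simpa [pvOMin] using pvOMin_acc_le rest c0
      | some a =>
        obtain ⟨x, hx, hxa⟩ := pvOMin_acc_le rest (min a c0)
        exact ⟨x, by simpa [pvOMin] using hx, le_trans hxa (min_le_right _ _)⟩
    · exact ih _ c0 h

theorem pv_foldMin_lb (b : Int) : ∀ (row : List (Option Int)) (acc : Option Int),
    (∀ c, some c ∈ row → b ≤ c) → (acc = none ∨ ∃ a, acc = some a ∧ b ≤ a) →
    (row.foldl pvOMin acc = none ∨ ∃ x, row.foldl pvOMin acc = some x ∧ b ≤ x) := by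
  intro row
  induction row with
  | nil => intro acc _ hacc; exact hacc
  | cons o rest ih =>
    intro acc hall hacc
    have hall' : ∀ c, some c ∈ rest → b ≤ c := fun c h => hall c (List.mem_cons_of_mem _ h)
    rw [List.foldl_cons]
    apply ih _ hall'
    cases o with
    | none =>
      rcases hacc with h | ⟨a, ha, hba⟩
      · rw [h]; exact Or.inl rfl
      · rw [ha]; exact Or.inr ⟨a, rfl, hba⟩
    | some v =>
      have hbv : b ≤ v := hall v List.mem_cons_self
      rcases hacc with h | ⟨a, ha, hba⟩
      · rw [h]; exact Or.inr ⟨v, rfl, hbv⟩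
      · rw [ha]; exact Or.inr ⟨min a v, rfl, le_min hba hbv⟩

theorem pvRow_mem_dget {n d : Int} {T : List (List (Option Int))} (hn : 1 ≤ n) (hd : 0 ≤ d)
    (hs : pvShape n d T) {o : Option Int}
    (hm : o ∈ (PySem.List.pyGet? T (n - 1)).getD []) :
    ∃ k : Int, 0 ≤ k ∧ k ≤ d ∧ pvDget T (n - 1) k = o := by
  obtain ⟨h1, heq⟩ := pvRow_spec hn hs
  rw [heq] at hm
  obtain ⟨i, hi, hio⟩ := List.mem_iff_getElem.1 hm
  have hlen : (T[(n - 1).toNat]).length = (d + 1).toNat := hs.2 _ (List.getElem_mem _)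
  have hkA : ((i : Int)).toNat < (T[(n - 1).toNat]).length := by simpa using hi
  have e1 := pvDget_norm (dist := T) (v := n - 1) (k := (i : Int)) (by omega)
    (Int.natCast_nonneg i) h1 hkA
  simp only [Int.toNat_natCast] at e1
  refine ⟨(i : Int), by omega, by rw [hlen] at hi; omega, ?_⟩
  rw [e1, hio]

theorem pvRow_dget_mem {n d : Int} {T : List (List (Option Int))} (hn : 1 ≤ n)
    (hs : pvShape n d T) {k : Int} (hk0 : 0 ≤ k) (hkd : k ≤ d) :
    pvDget T (n - 1) k ∈ (PySem.List.pyGet? T (n - 1)).getD [] := by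
  obtain ⟨h1, heq⟩ := pvRow_spec hn hs
  have hlen : (T[(n - 1).toNat]).length = (d + 1).toNat := hs.2 _ (List.getElem_mem _)
  have hkA : k.toNat < (T[(n - 1).toNat]).length := by rw [hlen]; omega
  have e1 := pvDget_norm (dist := T) (v := n - 1) (k := k) (by omega) hk0 h1 hkA
  rw [heq, e1]
  exact List.getElem_mem _

theorem pvAnswer_zero {n d : Int} {T : List (List (Option Int))} (hn : 1 ≤ n) (hd : 0 ≤ d)
    (hs : pvShape n d T)
    (h0 : ∃ k, 0 ≤ k ∧ k ≤ d ∧ pvDget T (n - 1) k = some 0)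
    (hpos : ∀ k c, 0 ≤ k → k ≤ d → pvDget T (n - 1) k = some c → 0 ≤ c) :
    pvAnswer T n = 0 := by
  obtain ⟨k0, hk00, hk0d, hk0v⟩ := h0
  have hmem : some (0 : Int) ∈ (PySem.List.pyGet? T (n - 1)).getD [] := by
    rw [← hk0v]
    exact pvRow_dget_mem hn hs hk00 hk0d
  have hall : ∀ c, some c ∈ (PySem.List.pyGet? T (n - 1)).getD [] → 0 ≤ c := by
    intro c hc
    obtain ⟨k, hk0, hkd, hkv⟩ := pvRow_mem_dget hn hd hs hc
    exact hpos k c hk0 hkd hkv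
  obtain ⟨x, hx, hx0⟩ := pv_foldMin_le _ none 0 hmem
  rcases pv_foldMin_lb 0 _ none hall (Or.inl rfl) with h | ⟨y, hy, hy0⟩
  · rw [hx] at h; cases h
  · rw [hx] at hy
    injection hy with hy
    unfold pvAnswer
    rw [hx]
    show x = 0
    omega

theorem pvAnswer_ne_zero {n d : Int} {T : List (List (Option Int))} (hn : 1 ≤ n) (hd : 0 ≤ d)
    (hs : pvShape n d T)
    (hlb : ∀ k c, 0 ≤ k → k ≤ d → pvDget T (n - 1) k = some c → 1 ≤ c) :
    pvAnswer T n ≠ 0 := by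
  have hall : ∀ c, some c ∈ (PySem.List.pyGet? T (n - 1)).getD [] → 1 ≤ c := by
    intro c hc
    obtain ⟨k, hk0, hkd, hkv⟩ := pvRow_mem_dget hn hd hs hc
    exact hlb k c hk0 hkd hkv
  rcases pv_foldMin_lb 1 _ none hall (Or.inl rfl) with h | ⟨y, hy, hy1⟩
  · unfold pvAnswer; rw [h]; show (-1 : Int) ≠ 0; omega
  · unfold pvAnswer; rw [hy]; show y ≠ 0; omega

theorem pvNAch_one {n : Int} {E : List (Int × Int × Int)} {d : Int} (hE : pvValidE n E)
    (hcond : ∀ e ∈ E, 1 ≤ e.2.2 ∧ (1 ≤ d → 2 ≤ e.2.2)) :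
    ∀ v k c, PvNAch E d v k c → 1 ≤ c := by
  intro v k c h
  induction h with
  | base he =>
    have := (hcond _ he).1
    simpa using this
  | baseD he hd' =>
    have h2 := (hcond _ he).2 (by omega)
    simp only [] at h2
    show 1 ≤ PySem.Int.floordiv _ 2
    unfold PySem.Int.floordiv
    rw [Int.fdiv_eq_ediv]
    omega
  | step _ he ih =>
    have := (hcond _ he).1
    simp only [] at this
    omega
  | stepD _ he hklt ih =>
    have h0 := (hE _ he).2.2.2.2
    simp only [] at h0
    have := pv_floordiv2_nonneg h0
    omega

-- ---------- assembling the equivalence ----------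

theorem pv_main {n : Int} {hw : List (List Int)} {d : Int}
    (hpre : Pre_minimumCost2 n hw d) (hnD : ¬ D_minimumCost2 n hw d) :
    minimumCost2 n hw d = minimumCost2_alt n hw d := by
  obtain ⟨hn, hd, hrows⟩ := hpre
  have hE : pvValidE n (pvEdges hw) := pvEdges_valid ⟨hn, hd, hrows⟩
  show pvAnswer (pvALoop (hw.foldl (fun acc row =>
      pvRowCase acc (fun u v t => (acc.modify u [] (· ++ [(v, t)])).modify v [] (· ++ [(u, t)])) row)
      ((PySem.List.pyRange 0 n 1).foldl (fun acc i => acc.insert i ([] : List (Int × Int)))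
        PySem.Dict.empty)) d [((0:Int), (0:Int), (0:Int))]
      ((PySem.List.pyRange 0 n 1).map (fun _ => List.replicate (d + 1).toNat (none : Option Int)))) n
    = pvAnswer (pvBLoop (pvEdges hw) d
        (pvDset ((PySem.List.pyRange 0 n 1).map (fun _ => List.replicate (d + 1).toNat (none : Option Int))) 0 0 0)) n
  have hadj : ∀ u, 0 ≤ u → u < n → ∀ vt : Int × Int,
      vt ∈ pvAdjGet (hw.foldl (fun acc row =>
        pvRowCase acc (fun u v t => (acc.modify u [] (· ++ [(v, t)])).modify v [] (· ++ [(u, t)])) row)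
        ((PySem.List.pyRange 0 n 1).foldl (fun acc i => acc.insert i ([] : List (Int × Int)))
          PySem.Dict.empty)) u ↔ (u, vt.1, vt.2) ∈ pvEdges hw :=
    fun u _ _ vt => pvAdjGet_char n hw u vt
  have hin00 : pvInR n d 0 0 := ⟨le_refl _, by omega, le_refl _, hd⟩
  have hsh0 := pvShape_init n d
  have hW20 : pvW2 n (pvEdges hw) d
      ((PySem.List.pyRange 0 n 1).map (fun _ => List.replicate (d + 1).toNat (none : Option Int))) := by
    intro v k c hin hget
    rw [pvDget_init hin] at hget
    cases hget
  have hW10 : pvW1 n (pvEdges hw) d [((0:Int), (0:Int), (0:Int))] := by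
    intro m hm
    rw [List.mem_singleton] at hm
    subst hm
    exact ⟨le_refl _, le_refl _, show (0:Int) < n by omega, le_refl _, hd, Or.inl rfl⟩
  obtain ⟨fshA, fW2A, ffixA, fsrcA⟩ := pvALoop_spec hE hn hd hadj [((0:Int), (0:Int), (0:Int))]
    ((PySem.List.pyRange 0 n 1).map (fun _ => List.replicate (d + 1).toNat (none : Option Int)))
    hsh0 hW10 hW20
    (by intro v k c hin hget; rw [pvDget_init hin] at hget; cases hget)
    (Or.inl List.mem_cons_self)
  have hlowA := pvLower hE hn hd ffixA fsrcA
  -- B side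
  have hsB0 : pvShape n d (pvDset ((PySem.List.pyRange 0 n 1).map
      (fun _ => List.replicate (d + 1).toNat (none : Option Int))) 0 0 0) :=
    pvShape_dset hsh0 hin00 0
  have hBInv0 : pvBInv n (pvEdges hw) d (pvDset ((PySem.List.pyRange 0 n 1).map
      (fun _ => List.replicate (d + 1).toNat (none : Option Int))) 0 0 0) := by
    refine ⟨hsB0, ?_⟩
    intro v k c hin hget
    by_cases hsame : v = 0 ∧ k = 0
    · obtain ⟨e1, e2⟩ := hsame; subst e1; subst e2
      rw [pvDget_dset_self hsh0 hin 0] at hget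
      cases hget
      exact PvAch.base0
    · rw [pvDget_dset_ne hsh0 hin00 hin (by tauto) 0, pvDget_init hin] at hget
      cases hget
  have hole0 : pvOle (pvDget (pvDset ((PySem.List.pyRange 0 n 1).map
      (fun _ => List.replicate (d + 1).toNat (none : Option Int))) 0 0 0) 0 0) 0 := by
    rw [pvDget_dset_self hsh0 hin00 0]
    exact ⟨0, rfl, le_refl _⟩
  obtain ⟨fBInv, fBsrc, fBfix, fBsrcRel⟩ := pvBLoop_spec hE hn hd _ hBInv0 hole0
  have hlowB : ∀ v k c, PvAch (pvEdges hw) d v k c →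
      pvOle (pvDget (pvBLoop (pvEdges hw) d (pvDset ((PySem.List.pyRange 0 n 1).map
        (fun _ => List.replicate (d + 1).toNat (none : Option Int))) 0 0 0)) v k) c := by
    intro v k c h
    rcases pvAch_cases h with ⟨e1, e2, e3⟩ | hn'
    · subst e1; subst e2; subst e3
      exact fBsrc
    · exact pvLower hE hn hd fBfix fBsrcRel _ _ _ hn'
  by_cases hn2 : 2 ≤ n
  · apply pvAnswer_congr hn hd fshA fBInv.1
    intro k hk0 hkd
    exact pvCell_eq fW2A hlowA fBInv.2 hlowB ⟨by omega, by omega, hk0, hkd⟩ (by omega)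
  · -- n = 1 but outside D_: some highway is free (toll 0, or toll ≤ 1 with a discount)
    have hn1 : n = 1 := by omega
    have hex : ∃ row ∈ hw, ¬ (1 ≤ row.getD 2 0 ∧ (1 ≤ d → 2 ≤ row.getD 2 0)) := by
      by_contra hcon
      push_neg at hcon
      exact hnD ⟨hn1, fun row hr => ⟨(hcon row hr).1, (hcon row hr).2⟩⟩
    obtain ⟨row, hrow, hbad⟩ := hex
    have hp := hrows row hrow
    have hlen := hp.1
    rcases row with _ | ⟨u, _ | ⟨v, _ | ⟨t, _ | _⟩⟩⟩ <;> simp at hlen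
    simp only [List.getD, List.getElem?_cons_zero, List.getElem?_cons_succ, Option.getD_some] at hp hbad
    have hu0 : u = 0 := by omega
    have hv0 : v = 0 := by omega
    have ht0 : 0 ≤ t := hp.2.2.2.2.2
    have hcheap : t = 0 ∨ (1 ≤ d ∧ t ≤ 1) := by omega
    have hedge : ((0:Int), (0:Int), t) ∈ pvEdges hw := by
      rw [pvEdges_eq_flatMap, List.mem_flatMap]
      refine ⟨[u, v, t], hrow, ?_⟩
      subst hu0; subst hv0
      simp [pvRowEdges]
    have hcheapN : ∃ k0, 0 ≤ k0 ∧ k0 ≤ d ∧ PvNAch (pvEdges hw) d 0 k0 0 := by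
      rcases hcheap with h | ⟨hd1, ht1⟩
      · subst h
        exact ⟨0, le_refl _, hd, PvNAch.base hedge⟩
      · refine ⟨1, by omega, by omega, ?_⟩
        have hb := PvNAch.baseD hedge (show 0 < d by omega)
        have hf : PySem.Int.floordiv t 2 = 0 := by
          unfold PySem.Int.floordiv
          rw [Int.fdiv_eq_ediv]
          omega
        rw [hf] at hb
        exact hb
    have hA0 : pvAnswer (pvALoop (hw.foldl (fun acc row =>
        pvRowCase acc (fun u v t => (acc.modify u [] (· ++ [(v, t)])).modify v [] (· ++ [(u, t)])) row)
        ((PySem.List.pyRange 0 n 1).foldl (fun acc i => acc.insert i ([] : List (Int × Int)))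
          PySem.Dict.empty)) d [((0:Int), (0:Int), (0:Int))]
        ((PySem.List.pyRange 0 n 1).map (fun _ => List.replicate (d + 1).toNat (none : Option Int)))) n = 0 := by
      apply pvAnswer_zero hn hd fshA
      · obtain ⟨k0, hk00, hk0d, hach⟩ := hcheapN
        refine ⟨k0, hk00, hk0d, ?_⟩
        obtain ⟨x, hx, hxle⟩ := hlowA _ _ _ hach
        have hge := pvNAch_nonneg hE (fW2A 0 k0 x ⟨le_refl _, by omega, hk00, hk0d⟩ hx)
        rw [show n - 1 = 0 by omega, hx]
        congr 1
        omega
      · intro k c hk0 hkd hv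
        exact pvNAch_nonneg hE (fW2A (n - 1) k c ⟨by omega, by omega, hk0, hkd⟩ hv)
    have hB0 : pvAnswer (pvBLoop (pvEdges hw) d
        (pvDset ((PySem.List.pyRange 0 n 1).map (fun _ => List.replicate (d + 1).toNat (none : Option Int))) 0 0 0)) n = 0 := by
      apply pvAnswer_zero hn hd fBInv.1
      · refine ⟨0, le_refl _, hd, ?_⟩
        obtain ⟨x, hx, hxle⟩ := fBsrc
        have hge := pvAch_nonneg hE (fBInv.2 0 0 x hin00 hx)
        rw [show n - 1 = 0 by omega, hx]
        congr 1
        omega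
      · intro k c hk0 hkd hv
        exact pvAch_nonneg hE (fBInv.2 (n - 1) k c ⟨by omega, by omega, hk0, hkd⟩ hv)
    rw [hA0, hB0]

-- ---------- the changed/tight side: n = 1 ----------

theorem pvNAch_nil {d v k c : Int} (h : PvNAch [] d v k c) : False := by
  cases h with
  | base he => cases he
  | baseD he _ => cases he
  | step _ he => cases he
  | stepD _ he _ => cases he

theorem pv_foldMin_none : ∀ (row : List (Option Int)), (∀ o ∈ row, o = none) →
    row.foldl pvOMin none = none := by
  intro row
  induction row with
  | nil => intro _; rfl
  | cons o rest ih =>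
    intro h
    have ho := h o List.mem_cons_self
    subst ho
    exact ih (fun o' h' => h o' (List.mem_cons_of_mem _ h'))

theorem pvAnswer_neg1 {n d : Int} {T : List (List (Option Int))} (hn : 1 ≤ n) (hd : 0 ≤ d)
    (hs : pvShape n d T) (hnone : ∀ k, 0 ≤ k → k ≤ d → pvDget T (n - 1) k = none) :
    pvAnswer T n = -1 := by
  have hall : ∀ o ∈ (PySem.List.pyGet? T (n - 1)).getD [], o = none := by
    intro o ho
    obtain ⟨k, hk0, hkd, hkv⟩ := pvRow_mem_dget hn hd hs ho
    rw [← hkv]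
    exact hnone k hk0 hkd
  unfold pvAnswer
  rw [pv_foldMin_none _ hall]

theorem pvA_w : minimumCost2 1 [] 0 = -1 := by
  have hE : pvValidE 1 (pvEdges []) := by intro e he; cases he
  have hadj : ∀ u, 0 ≤ u → u < 1 → ∀ vt : Int × Int,
      vt ∈ pvAdjGet (([] : List (List Int)).foldl (fun acc row =>
        pvRowCase acc (fun u v t => (acc.modify u [] (· ++ [(v, t)])).modify v [] (· ++ [(u, t)])) row)
        ((PySem.List.pyRange 0 1 1).foldl (fun acc i => acc.insert i ([] : List (Int × Int)))
          PySem.Dict.empty)) u ↔ (u, vt.1, vt.2) ∈ pvEdges [] :=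
    fun u _ _ vt => pvAdjGet_char 1 [] u vt
  have hsh0 := pvShape_init 1 0
  obtain ⟨fshA, fW2A, _, _⟩ := pvALoop_spec (n := 1) (d := 0) hE (le_refl _) (le_refl _) hadj
    [((0:Int), (0:Int), (0:Int))]
    ((PySem.List.pyRange 0 1 1).map (fun _ => List.replicate ((0:Int) + 1).toNat (none : Option Int)))
    hsh0
    (by
      intro m hm
      rw [List.mem_singleton] at hm
      subst hm
      exact ⟨le_refl _, le_refl _, show (0:Int) < 1 by omega, le_refl _, le_refl _, Or.inl rfl⟩)
    (by intro v k c hin hget; rw [pvDget_init hin] at hget; cases hget)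
    (by intro v k c hin hget; rw [pvDget_init hin] at hget; cases hget)
    (Or.inl List.mem_cons_self)
  show pvAnswer _ 1 = -1
  apply pvAnswer_neg1 (le_refl _) (le_refl _) fshA
  intro k hk0 hkd
  cases hv : pvDget _ (1 - 1) k with
  | none => rfl
  | some c =>
    exact absurd (fW2A (1 - 1) k c ⟨by omega, by omega, hk0, hkd⟩ hv) pvNAch_nil

theorem pvB_w : minimumCost2_alt 1 [] 0 = 0 := by
  have hE : pvValidE 1 (pvEdges []) := by intro e he; cases he
  have hin00 : pvInR 1 0 0 0 := ⟨le_refl _, by omega, le_refl _, le_refl _⟩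
  have hsh0 := pvShape_init 1 0
  have hBInv0 : pvBInv 1 (pvEdges []) 0
      (pvDset ((PySem.List.pyRange 0 1 1).map (fun _ => List.replicate ((0:Int) + 1).toNat (none : Option Int))) 0 0 0) := by
    refine ⟨pvShape_dset hsh0 hin00 0, ?_⟩
    intro v k c hin hget
    by_cases hsame : v = 0 ∧ k = 0
    · obtain ⟨e1, e2⟩ := hsame; subst e1; subst e2
      rw [pvDget_dset_self hsh0 hin 0] at hget
      cases hget
      exact PvAch.base0
    · rw [pvDget_dset_ne hsh0 hin00 hin (by tauto) 0, pvDget_init hin] at hget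
      cases hget
  have hole0 : pvOle (pvDget (pvDset ((PySem.List.pyRange 0 1 1).map
      (fun _ => List.replicate ((0:Int) + 1).toNat (none : Option Int))) 0 0 0) 0 0) 0 := by
    rw [pvDget_dset_self hsh0 hin00 0]
    exact ⟨0, rfl, le_refl _⟩
  obtain ⟨fBInv, fBsrc, _, _⟩ := pvBLoop_spec (n := 1) hE (le_refl _) (le_refl _) _ hBInv0 hole0
  show pvAnswer _ 1 = 0
  apply pvAnswer_zero (le_refl _) (le_refl _) fBInv.1
  · refine ⟨0, le_refl _, le_refl _, ?_⟩
    obtain ⟨x, hx, hxle⟩ := fBsrc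
    have hge := pvAch_nonneg hE (fBInv.2 0 0 x hin00 hx)
    rw [show (1:Int) - 1 = 0 by omega, hx]
    congr 1
    omega
  · intro k c hk0 hkd hv
    exact pvAch_nonneg hE (fBInv.2 (1 - 1) k c ⟨by omega, by omega, hk0, hkd⟩ hv)

theorem pv_tight_main {n : Int} {hw : List (List Int)} {d : Int}
    (hpre : Pre_minimumCost2 n hw d) (hD : D_minimumCost2 n hw d) :
    minimumCost2 n hw d ≠ minimumCost2_alt n hw d := by
  obtain ⟨hn, hd, hrows⟩ := hpre
  obtain ⟨hn1, htolls⟩ := hD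
  have hE : pvValidE n (pvEdges hw) := pvEdges_valid ⟨hn, hd, hrows⟩
  have hcond : ∀ e ∈ pvEdges hw, 1 ≤ e.2.2 ∧ (1 ≤ d → 2 ≤ e.2.2) := by
    intro e he
    obtain ⟨row, hrow, hte⟩ := pv_mem_pvEdges_toll ⟨hn, hd, hrows⟩ he
    have := htolls row hrow
    rw [hte] at this
    exact this
  -- B = 0 (as in pv_main)
  have hin00 : pvInR n d 0 0 := ⟨le_refl _, by omega, le_refl _, hd⟩
  have hsh0 := pvShape_init n d
  have hBInv0 : pvBInv n (pvEdges hw) d (pvDset ((PySem.List.pyRange 0 n 1).map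
      (fun _ => List.replicate (d + 1).toNat (none : Option Int))) 0 0 0) := by
    refine ⟨pvShape_dset hsh0 hin00 0, ?_⟩
    intro v k c hin hget
    by_cases hsame : v = 0 ∧ k = 0
    · obtain ⟨e1, e2⟩ := hsame; subst e1; subst e2
      rw [pvDget_dset_self hsh0 hin 0] at hget
      cases hget
      exact PvAch.base0
    · rw [pvDget_dset_ne hsh0 hin00 hin (by tauto) 0, pvDget_init hin] at hget
      cases hget
  have hole0 : pvOle (pvDget (pvDset ((PySem.List.pyRange 0 n 1).map
      (fun _ => List.replicate (d + 1).toNat (none : Option Int))) 0 0 0) 0 0) 0 := by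
    rw [pvDget_dset_self hsh0 hin00 0]
    exact ⟨0, rfl, le_refl _⟩
  obtain ⟨fBInv, fBsrc, _, _⟩ := pvBLoop_spec hE hn hd _ hBInv0 hole0
  have hB0 : minimumCost2_alt n hw d = 0 := by
    show pvAnswer _ n = 0
    apply pvAnswer_zero hn hd fBInv.1
    · refine ⟨0, le_refl _, hd, ?_⟩
      obtain ⟨x, hx, hxle⟩ := fBsrc
      have hge := pvAch_nonneg hE (fBInv.2 0 0 x hin00 hx)
      rw [show n - 1 = 0 by omega, hx]
      congr 1
      omega
    · intro k c hk0 hkd hv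
      exact pvAch_nonneg hE (fBInv.2 (n - 1) k c ⟨by omega, by omega, hk0, hkd⟩ hv)
  -- A ≠ 0
  have hadj : ∀ u, 0 ≤ u → u < n → ∀ vt : Int × Int,
      vt ∈ pvAdjGet (hw.foldl (fun acc row =>
        pvRowCase acc (fun u v t => (acc.modify u [] (· ++ [(v, t)])).modify v [] (· ++ [(u, t)])) row)
        ((PySem.List.pyRange 0 n 1).foldl (fun acc i => acc.insert i ([] : List (Int × Int)))
          PySem.Dict.empty)) u ↔ (u, vt.1, vt.2) ∈ pvEdges hw :=
    fun u _ _ vt => pvAdjGet_char n hw u vt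
  obtain ⟨fshA, fW2A, _, _⟩ := pvALoop_spec hE hn hd hadj [((0:Int), (0:Int), (0:Int))]
    ((PySem.List.pyRange 0 n 1).map (fun _ => List.replicate (d + 1).toNat (none : Option Int)))
    hsh0
    (by
      intro m hm
      rw [List.mem_singleton] at hm
      subst hm
      exact ⟨le_refl _, le_refl _, show (0:Int) < n by omega, le_refl _, hd, Or.inl rfl⟩)
    (by intro v k c hin hget; rw [pvDget_init hin] at hget; cases hget)
    (by intro v k c hin hget; rw [pvDget_init hin] at hget; cases hget)
    (Or.inl List.mem_cons_self)
  have hA : minimumCost2 n hw d ≠ 0 := by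
    show pvAnswer _ n ≠ 0
    apply pvAnswer_ne_zero hn hd fshA
    intro k c hk0 hkd hv
    exact pvNAch_one hE hcond _ _ _ (fW2A (n - 1) k c ⟨by omega, by omega, hk0, hkd⟩ hv)
  rw [hB0]
  exact hA

theorem minimumCost2_changed : Claim_changed_minimumCost2 := by
  unfold Claim_changed_minimumCost2
  refine ⟨by decide, by decide, by decide, pvA_w, pvB_w, by decide⟩

theorem minimumCost2_tight : Claim_exact_minimumCost2 := by
  intro n hw d _ hpre hD
  exact pv_tight_main hpre hD

-- ===== VERDICT (by name: the statement is the Claim_ definition above) =====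
theorem minimumCost2_spec : Claim_unchanged_minimumCost2 := by
  intro n hw d hdom hpre
  intro hnD
  exact pv_main hpre hnD
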